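-- pv_equiv track=rewrite | github.com/88abaa99/SecurityGoldreichPRG | Instantiation.py | build_binary_matrix_optimized
-- ===== SOURCE A (Python) =====
-- def build_binary_matrix_optimized(system, output, nb_cols):
--     nb_rows = max(len(system), nb_cols) #En theorie, len(system) >= nb_cols, mais ce n'est pas toujours le cas a causes des guesses qui ne sont pas exacts
--     M = [[0]*nb_cols for i in range(nb_rows)]
--     B = [0]*nb_rows
--     already_used_rows_in_matrix = [0]*nb_rows
--     already_used_rows_in_system = [0]*nb_rows
--     nb_supplementary_rows = 0
--     for i in range(len(system)):
--         first_one = min([system[i][j] for j in range(len(system[i]))])  #Search the first 1 in the equation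
--         if not already_used_rows_in_matrix[first_one]:                  #try to put this first 1 in the diagonal
--             already_used_rows_in_matrix[first_one] = 1
--             already_used_rows_in_system[i] = 1
--             for j in range(len(system[i])):                             #copy the equation
--                 M[first_one][system[i][j]] ^= 1
--             B[first_one] = output[i]
--
--         else:                                                           #if the row is already used, put the equation in the supplementary rows
--             if nb_supplementary_rows < nb_rows - nb_cols:               #if there are not too many supplementary equations, add it
--                 already_used_rows_in_matrix[nb_cols + nb_supplementary_rows] = 1
--                 already_used_rows_in_system[i] = 1
--                 for j in range(len(system[i])):
--                     M[nb_cols + nb_supplementary_rows][system[i][j]] ^= 1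
--                 B[nb_cols + nb_supplementary_rows] = output[i]
--                 nb_supplementary_rows += 1
--
--     free_row = 0
--     for i in range(len(system)):                                            #check that all rows of the system have been copied
--         if not already_used_rows_in_system[i]:                              #if not, copy it
--             while already_used_rows_in_matrix[free_row]:                    #find a free row in the matrix
--                 free_row += 1
--             for j in range(len(system[i])):
--                 M[free_row][system[i][j]] ^= 1
--             B[free_row] = output[i]
--             already_used_rows_in_system[i] = 1
--             already_used_rows_in_matrix[free_row] = 1
--     return (M,B)
-- ===== SOURCE B (Python) =====
-- def build_binary_matrix_optimized(system, output, nb_cols):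
--     nb_rows = max(len(system), nb_cols)
--     mins = [min(eq) for eq in system]
--     # an equation is "primary" iff its min column occurs for the first time there
--     primaries = [(m, i) for i, m in enumerate(mins) if mins.index(m) == i]
--     dups = [i for i, m in enumerate(mins) if mins.index(m) != i]
--     cap = nb_rows - nb_cols
--     assign = primaries + [(nb_cols + j, i) for j, i in enumerate(dups[:cap])]
--     taken = [r for r, _ in assign]
--     free = [r for r in range(nb_rows) if r not in taken]
--     assign = assign + list(zip(free, dups[cap:]))
--     M, B = [], []
--     for r in range(nb_rows):
--         hits = [i for rr, i in assign if rr == r]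
--         if hits:
--             i = hits[0]
--             row = [0] * nb_cols
--             for c in system[i]:
--                 row[c] ^= 1
--             M.append(row)
--             B.append(output[i])
--         else:
--             M.append([0] * nb_cols)
--             B.append(0)
--     return (M, B)
-- ===== Notes on version B (the rewrite author's own statement) =====
-- stated objective: alternative
-- what changed: Replaces A's stateful two-pass greedy (mutable used-flag arrays, in-place XOR into M, supplementary counter, rescan with a free-row pointer) by a declarative construction: classify each equation by whether its min column is a first occurrence, build the row-assignment association list (first-occurrence rows, then the supplementary block, then leftovers zipped with free rows), and construct each matrix row independently from that assignment with no mutation of M.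
-- outside the precondition, e.g. on build_binary_matrix_optimized([[-1]], [1], 1): A returns ([[1]], [1]), B returns ([[0]], [0])
import Mathlib
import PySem

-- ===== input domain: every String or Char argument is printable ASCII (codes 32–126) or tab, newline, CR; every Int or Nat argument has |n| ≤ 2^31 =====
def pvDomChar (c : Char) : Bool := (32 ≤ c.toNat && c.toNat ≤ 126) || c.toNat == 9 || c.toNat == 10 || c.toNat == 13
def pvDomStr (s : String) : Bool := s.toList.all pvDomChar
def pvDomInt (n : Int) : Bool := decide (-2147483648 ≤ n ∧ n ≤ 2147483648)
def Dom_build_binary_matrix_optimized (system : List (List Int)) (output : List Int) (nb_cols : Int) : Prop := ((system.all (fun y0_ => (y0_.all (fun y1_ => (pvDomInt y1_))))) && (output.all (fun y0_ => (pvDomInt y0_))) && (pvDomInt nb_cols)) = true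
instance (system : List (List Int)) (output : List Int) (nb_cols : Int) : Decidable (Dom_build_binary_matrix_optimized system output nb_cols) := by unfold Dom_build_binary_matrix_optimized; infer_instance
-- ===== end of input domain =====

-- B replaces A's stateful two-pass greedy (flag arrays, in-place XOR, rescans) by a declarative construction: classify equations by first occurrence of their min column, build the row-assignment association list, and build each matrix row independently (alternative decomposition, same cost).


-- ===== PORT A =====

-- M[r][c] ^= 1  (Python negative-from-end indexing via pySetD/pyGetD)
def pvXorAt (M : List (List Int)) (r c : Int) : List (List Int) :=
  let row := PySem.List.pyGetD M r []
  PySem.List.pySetD M r (PySem.List.pySetD row c (PySem.Int.bxor (PySem.List.pyGetD row c 0) 1))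

-- for j in range(len(eq)): M[r][eq[j]] ^= 1
def pvCopyEq (M : List (List Int)) (r : Int) (eq : List Int) : List (List Int) :=
  eq.foldl (fun Mc c => pvXorAt Mc r c) M

-- first pass of A: state (M, B, already_used_rows_in_matrix, already_used_rows_in_system, nb_supplementary_rows)
def pvLoop1A (nb_cols nb_rows : Int) (output : List Int) (i : Nat) (eqs : List (List Int))
    (M : List (List Int)) (B usedM usedS : List Int) (supp : Int) :
    List (List Int) × List Int × List Int × List Int × Int :=
  match eqs with
  | [] => (M, B, usedM, usedS, supp)
  | eq :: rest =>
      let first_one : Int := (PySem.List.min? eq (fun x => x)).getD 0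
      if PySem.List.pyGetD usedM first_one 0 = 0 then
        pvLoop1A nb_cols nb_rows output (i+1) rest
          (pvCopyEq M first_one eq)
          (PySem.List.pySetD B first_one (PySem.List.pyGetD output (i : Int) 0))
          (PySem.List.pySetD usedM first_one 1)
          (PySem.List.pySetD usedS (i : Int) 1)
          supp
      else if supp < nb_rows - nb_cols then
        pvLoop1A nb_cols nb_rows output (i+1) rest
          (pvCopyEq M (nb_cols + supp) eq)
          (PySem.List.pySetD B (nb_cols + supp) (PySem.List.pyGetD output (i : Int) 0))
          (PySem.List.pySetD usedM (nb_cols + supp) 1)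
          (PySem.List.pySetD usedS (i : Int) 1)
          (supp + 1)
      else
        pvLoop1A nb_cols nb_rows output (i+1) rest M B usedM usedS supp

-- while already_used_rows_in_matrix[free_row]: free_row += 1   (under Pre_ the scan never leaves the list)
def pvFindFree (usedM : List Int) (r : Int) : Int :=
  if h : 0 ≤ r ∧ r < (usedM.length : Int) then
    if PySem.List.pyGetD usedM r 0 ≠ 0 then pvFindFree usedM (r + 1) else r
  else r
termination_by ((usedM.length : Int) - r).toNat
decreasing_by omega

-- second pass of A over the whole system, skipping rows already placed
def pvLoop2A (output : List Int) (i : Nat) (eqs : List (List Int))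
    (M : List (List Int)) (B usedM usedS : List Int) (free_row : Int) :
    List (List Int) × List Int :=
  match eqs with
  | [] => (M, B)
  | eq :: rest =>
      if PySem.List.pyGetD usedS (i : Int) 0 = 0 then
        let f := pvFindFree usedM free_row
        pvLoop2A output (i+1) rest (pvCopyEq M f eq)
          (PySem.List.pySetD B f (PySem.List.pyGetD output (i : Int) 0))
          (PySem.List.pySetD usedM f 1)
          (PySem.List.pySetD usedS (i : Int) 1) f
      else
        pvLoop2A output (i+1) rest M B usedM usedS free_row

def build_binary_matrix_optimized (system : List (List Int)) (output : List Int) (nb_cols : Int) : List (List Int) × List Int :=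
  let nb_rows : Int := max (system.length : Int) nb_cols
  let M := List.replicate nb_rows.toNat (List.replicate nb_cols.toNat (0 : Int))
  let B := List.replicate nb_rows.toNat (0 : Int)
  let usedM := List.replicate nb_rows.toNat (0 : Int)
  let usedS := List.replicate nb_rows.toNat (0 : Int)
  match pvLoop1A nb_cols nb_rows output 0 system M B usedM usedS 0 with
  | (M1, B1, uM, uS, _) => pvLoop2A output 0 system M1 B1 uM uS 0

-- ===== PORT B =====

-- row = [0]*nb_cols; for c in eq: row[c] ^= 1
def pvRowContent (nb_cols : Int) (eq : List Int) : List Int :=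
  eq.foldl (fun row c => PySem.List.pySetD row c (PySem.Int.bxor (PySem.List.pyGetD row c 0) 1))
    (List.replicate nb_cols.toNat (0 : Int))

-- mins = [min(eq) for eq in system]
def pvMins (system : List (List Int)) : List Int :=
  system.map (fun eq => (PySem.List.min? eq (fun x => x)).getD 0)

-- the test  mins.index(m) == i  on an enumerate pair (i, m)
def pvAltTest (mins : List Int) (p : Int × Int) : Bool :=
  (((PySem.List.index? mins p.2).getD 0 : Nat) : Int) == p.1

-- primaries = [(m, i) for i, m in enumerate(mins) if mins.index(m) == i]
def pvAltPrimaries (mins : List Int) : List (Int × Int) :=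
  (PySem.List.enumerate mins).filterMap
    (fun p => if pvAltTest mins p then some (p.2, p.1) else none)

-- dups = [i for i, m in enumerate(mins) if mins.index(m) != i]
def pvAltDups (mins : List Int) : List Int :=
  (PySem.List.enumerate mins).filterMap
    (fun p => if pvAltTest mins p then none else some p.1)

def build_binary_matrix_optimized_alt (system : List (List Int)) (output : List Int) (nb_cols : Int) : List (List Int) × List Int :=
  let nb_rows : Int := max (system.length : Int) nb_cols
  let mins := pvMins system
  let dups := pvAltDups mins
  let cap : Int := nb_rows - nb_cols
  let assign1 : List (Int × Int) :=
    pvAltPrimaries mins ++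
      (PySem.List.enumerate (PySem.List.slice dups none (some cap))).map
        (fun p => (nb_cols + p.1, p.2))
  let taken : List Int := assign1.map Prod.fst
  let free : List Int := (PySem.List.pyRange 0 nb_rows 1).filter (fun r => !(taken.contains r))
  let assign2 : List (Int × Int) := assign1 ++ free.zip (PySem.List.slice dups (some cap) none)
  let MB : List (List Int × Int) := (PySem.List.pyRange 0 nb_rows 1).map (fun r =>
    match assign2.filterMap (fun p => if p.1 == r then some p.2 else none) with
    | [] => (List.replicate nb_cols.toNat (0 : Int), (0 : Int))
    | i :: _ => (pvRowContent nb_cols (PySem.List.pyGetD system i []), PySem.List.pyGetD output i 0))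
  (MB.map Prod.fst, MB.map Prod.snd)

-- ===== PRECONDITION & SPEC =====
-- Pre_ is the function's natural domain: every equation nonempty with its column indices in [0, nb_cols),
-- and output covering every equation.  Outside it Python A raises (min of an empty equation → ValueError;
-- a column ≥ nb_cols or < -nb_cols, or output shorter than system → IndexError), except for equations with
-- negative in-range column indices, which are not column numbers at all: there A returns an accidental
-- negative-index-wraparound placement that B does not reproduce, so the claim does not cover them.
def Pre_build_binary_matrix_optimized (system : List (List Int)) (output : List Int) (nb_cols : Int) : Prop :=
  (∀ eq ∈ system, eq ≠ [] ∧ ∀ c ∈ eq, 0 ≤ c ∧ c < nb_cols) ∧ (system.length : Int) ≤ (output.length : Int)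
instance (system : List (List Int)) (output : List Int) (nb_cols : Int) : Decidable (Pre_build_binary_matrix_optimized system output nb_cols) := by unfold Pre_build_binary_matrix_optimized; infer_instance

def pvWitness_build_binary_matrix_optimized : List (List Int) × List Int × Int :=
  ([[0, 2], [0, 1], [1]], [1, 0, 1], 3)

def Spec_build_binary_matrix_optimized (system : List (List Int)) (output : List Int) (nb_cols : Int) (out : List (List Int) × List Int) : Prop := out = build_binary_matrix_optimized_alt system output nb_cols
instance (system : List (List Int)) (output : List Int) (nb_cols : Int) (out : List (List Int) × List Int) : Decidable (Spec_build_binary_matrix_optimized system output nb_cols out) := by unfold Spec_build_binary_matrix_optimized; infer_instance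

-- ===== CLAIM (what is proved, stated in full; the proofs are below) =====
def Claim_equal_build_binary_matrix_optimized : Prop := ∀ (system : List (List Int)) (output : List Int) (nb_cols : Int), Dom_build_binary_matrix_optimized system output nb_cols → Pre_build_binary_matrix_optimized system output nb_cols → Spec_build_binary_matrix_optimized system output nb_cols (build_binary_matrix_optimized system output nb_cols)

-- ===== LEMMAS AND PROOFS =====

-- ---- proof-internal intermediate program: A's greedy recast as a single pass with a pending list ----
-- (used only as a stepping stone: A is first proved equal to pvMid, then pvMid equal to the declarative B)
def pvMidLoop1 (nb_cols nb_rows : Int) (output : List Int) (i : Nat) (eqs : List (List Int))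
    (M : List (List Int)) (B used : List Int) (supp : Int) (pending : List Nat) :
    List (List Int) × List Int × List Int × Int × List Nat :=
  match eqs with
  | [] => (M, B, used, supp, pending)
  | eq :: rest =>
      let first_one : Int := (PySem.List.min? eq (fun x => x)).getD 0
      let sel : Option (Int × Int) :=
        if PySem.List.pyGetD used first_one 0 = 0 then some (first_one, supp)
        else if supp < nb_rows - nb_cols then some (nb_cols + supp, supp + 1)
        else none
      match sel with
      | none => pvMidLoop1 nb_cols nb_rows output (i+1) rest M B used supp (pending ++ [i])
      | some (row, supp') =>
          pvMidLoop1 nb_cols nb_rows output (i+1) rest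
            (pvCopyEq M row eq)
            (PySem.List.pySetD B row (PySem.List.pyGetD output (i : Int) 0))
            (PySem.List.pySetD used row 1) supp' pending

def pvMidLoop2 (system : List (List Int)) (output : List Int) (pairs : List (Nat × Int))
    (M : List (List Int)) (B : List Int) : List (List Int) × List Int :=
  match pairs with
  | [] => (M, B)
  | (i, row) :: rest =>
      pvMidLoop2 system output rest
        (pvCopyEq M row (PySem.List.pyGetD system (i : Int) []))
        (PySem.List.pySetD B row (PySem.List.pyGetD output (i : Int) 0))

def pvMid (system : List (List Int)) (output : List Int) (nb_cols : Int) : List (List Int) × List Int :=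
  let nb_rows : Int := max (system.length : Int) nb_cols
  let M := List.replicate nb_rows.toNat (List.replicate nb_cols.toNat (0 : Int))
  let B := List.replicate nb_rows.toNat (0 : Int)
  match pvMidLoop1 nb_cols nb_rows output 0 system M B (List.replicate nb_rows.toNat (0 : Int)) 0 [] with
  | (M1, B1, used, _, pending) =>
      let free_rows := (PySem.List.pyRange 0 nb_rows 1).filter (fun r => PySem.List.pyGetD used r 0 == 0)
      pvMidLoop2 system output (pending.zip free_rows) M1 B1

-- free matrix rows at or above pointer fr, ascending (abstraction of A's flag array)
def pvFreesI (usedM : List Int) (fr : Int) : List Int :=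
  (PySem.List.pyRange fr (usedM.length : Int) 1).filter (fun r => PySem.List.pyGetD usedM r 0 == 0)

-- still-unplaced equation indices in [i, i+k) (abstraction of A's already_used_rows_in_system)
def pvPends (usedS : List Int) (i k : Nat) : List Nat :=
  (List.range' i k).filter (fun j => usedS.getD j 0 == 0)

theorem pv_getD_int (xs : List Int) (x d : Int) (hx : 0 ≤ x) :
    PySem.List.pyGetD xs x d = xs.getD x.toNat d := by
  have h : ((x.toNat : Nat) : Int) = x := Int.toNat_of_nonneg hx
  rw [← h, PySem.List.pyGetD_natCast, Int.toNat_natCast]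

theorem pv_getD_set_ne (xs : List Int) (i j : Nat) (v d : Int) (h : i ≠ j) :
    (xs.set i v).getD j d = xs.getD j d := by
  simp [List.getD_eq_getElem?_getD, h]

theorem pv_getD_set_self (xs : List Int) (i : Nat) (v d : Int) (h : i < xs.length) :
    (xs.set i v).getD i d = v := by
  simp [List.getD_eq_getElem?_getD, h]

theorem pv_getD_set_int (xs : List Int) (x y v d : Int) (hx : 0 ≤ x) (hxl : x < (xs.length : Int))
    (hy : 0 ≤ y) :
    PySem.List.pyGetD (PySem.List.pySetD xs x v) y d = if y = x then v else PySem.List.pyGetD xs y d := by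
  rw [PySem.List.pySetD_of_nonneg xs v hx, pv_getD_int _ _ _ hy, pv_getD_int _ _ _ hy]
  by_cases hxy : y = x
  · subst hxy
    rw [if_pos rfl, pv_getD_set_self]
    omega
  · rw [if_neg hxy, pv_getD_set_ne]
    omega

theorem pv_frees_step (usedM : List Int) (fr f : Int) (t : List Int) (hfr : 0 ≤ fr)
    (h : pvFreesI usedM fr = f :: t) :
    pvFindFree usedM fr = f ∧ 0 ≤ f ∧ f < (usedM.length : Int) ∧
      pvFreesI (PySem.List.pySetD usedM f 1) f = t := by
  suffices H : ∀ (k : Nat) (fr f : Int) (t : List Int), 0 ≤ fr →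
      (((usedM.length : Int) - fr).toNat ≤ k) → pvFreesI usedM fr = f :: t →
      pvFindFree usedM fr = f ∧ 0 ≤ f ∧ f < (usedM.length : Int) ∧
        pvFreesI (PySem.List.pySetD usedM f 1) f = t by
    exact H _ fr f t hfr le_rfl h
  intro k
  induction k with
  | zero =>
      intro fr f t hfr hk h
      unfold pvFreesI at h
      rw [PySem.List.pyRange_one_eq_nil (by omega)] at h
      simp at h
  | succ k ih =>
      intro fr f t hfr hk h
      by_cases hlt : fr < (usedM.length : Int)
      · have hcons := PySem.List.pyRange_one_cons hlt
        unfold pvFreesI at h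
        rw [hcons, List.filter_cons] at h
        by_cases hflag : PySem.List.pyGetD usedM fr 0 = 0
        · simp only [hflag, BEq.rfl, if_true] at h
          obtain ⟨hf, ht⟩ : fr = f ∧ (PySem.List.pyRange (fr + 1) (usedM.length : Int) 1).filter
              (fun r => PySem.List.pyGetD usedM r 0 == 0) = t := by
            constructor
            · exact (List.cons.injEq _ _ _ _ ▸ h).1
            · exact (List.cons.injEq _ _ _ _ ▸ h).2
          subst hf
          refine ⟨?_, hfr, hlt, ?_⟩
          · rw [pvFindFree, dif_pos ⟨hfr, hlt⟩, if_neg (fun hn => hn hflag)]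
          · unfold pvFreesI
            rw [PySem.List.length_pySetD, hcons, List.filter_cons]
            have h1 : PySem.List.pyGetD (PySem.List.pySetD usedM fr 1) fr 0 = 1 := by
              rw [pv_getD_set_int _ _ _ _ _ hfr hlt hfr, if_pos rfl]
            simp only [h1]
            rw [if_neg (by simp)]
            rw [← ht]
            apply List.filter_congr
            intro r hr
            have hr' := PySem.List.mem_pyRange_one.1 hr
            rw [pv_getD_set_int _ _ _ _ _ hfr hlt (by omega), if_neg (by omega)]
        · rw [if_neg (by simpa using hflag)] at h
          have key := ih (fr + 1) f t (by omega) (by omega) (by unfold pvFreesI; exact h)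
          refine ⟨?_, key.2.1, key.2.2.1, key.2.2.2⟩
          rw [pvFindFree, dif_pos ⟨hfr, hlt⟩, if_pos hflag]
          exact key.1
      · unfold pvFreesI at h
        rw [PySem.List.pyRange_one_eq_nil (by omega)] at h
        simp at h

theorem pv_sim2 (system : List (List Int)) (output : List Int) :
    ∀ (eqs : List (List Int)) (i : Nat) (M : List (List Int)) (B usedM usedS : List Int) (fr : Int),
      eqs = system.drop i → 0 ≤ fr →
      (pvPends usedS i eqs.length).length ≤ (pvFreesI usedM fr).length →
      pvLoop2A output i eqs M B usedM usedS fr =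
        pvMidLoop2 system output ((pvPends usedS i eqs.length).zip (pvFreesI usedM fr)) M B := by
  intro eqs
  induction eqs with
  | nil =>
      intro i M B usedM usedS fr _ _ _
      simp [pvLoop2A, pvMidLoop2, pvPends]
  | cons eq rest ih =>
      intro i M B usedM usedS fr hdrop hfr hlen
      have hi : i < system.length := by
        have := congrArg List.length hdrop
        simp [List.length_drop] at this
        omega
      have hcons := List.drop_eq_getElem_cons hi
      rw [hcons] at hdrop
      obtain ⟨heq, hrest⟩ : eq = system[i] ∧ rest = system.drop (i + 1) := by
        constructor
        · exact ((List.cons.injEq _ _ _ _ ▸ hdrop.symm).1).symm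
        · exact ((List.cons.injEq _ _ _ _ ▸ hdrop.symm).2).symm
      have hpends : pvPends usedS i (eq :: rest).length =
          (if usedS.getD i 0 == 0 then [i] else []) ++ pvPends usedS (i + 1) rest.length := by
        unfold pvPends
        rw [List.length_cons, List.range'_succ, List.filter_cons]
        split_ifs <;> simp
      by_cases hflag : usedS.getD i 0 = 0
      · rw [hpends, if_pos (by rw [hflag]; rfl)] at hlen ⊢
        simp only [List.singleton_append] at hlen ⊢
        have hne : pvFreesI usedM fr ≠ [] := by
          intro hnil
          rw [hnil] at hlen
          simp at hlen
        rcases hfl : pvFreesI usedM fr with _ | ⟨f, t⟩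
        · exact absurd hfl hne
        obtain ⟨hff, hf0, hfltn, hfrees'⟩ := pv_frees_step usedM fr f t hfr hfl
        have hAcond : PySem.List.pyGetD usedS (i : Int) 0 = 0 := by
          rw [PySem.List.pyGetD_natCast]
          exact hflag
        have hpends' : pvPends (PySem.List.pySetD usedS (i : Int) 1) (i + 1) rest.length =
            pvPends usedS (i + 1) rest.length := by
          unfold pvPends
          rw [PySem.List.pySetD_natCast]
          apply List.filter_congr
          intro j hj
          have hj' := List.mem_range'_1.1 hj
          rw [pv_getD_set_ne _ _ _ _ _ (by omega)]
        have hsys : PySem.List.pyGetD system (i : Int) [] = eq := by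
          rw [PySem.List.pyGetD_natCast, List.getD_eq_getElem?_getD, List.getElem?_eq_getElem hi]
          simp [heq]
        rw [List.zip_cons_cons]
        simp only [pvMidLoop2]
        rw [hsys]
        simp only [pvLoop2A]
        rw [if_pos hAcond, hff]
        rw [← hpends', ← hfrees']
        exact ih (i + 1) _ _ _ _ f hrest hf0 (by rw [hpends', hfrees']; rw [hfl] at hlen; simpa using hlen)
      · rw [hpends, if_neg (by simpa using hflag)] at hlen ⊢
        simp only [List.nil_append] at hlen ⊢
        simp only [pvLoop2A]
        rw [if_neg (by rw [PySem.List.pyGetD_natCast]; exact hflag)]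
        exact ih (i + 1) M B usedM usedS fr hrest hfr hlen

theorem pv_sim1 (nb_cols nb_rows : Int) (output : List Int)
    (hnb : 0 ≤ nb_cols) (hcols : nb_cols ≤ nb_rows) :
    ∀ (eqs : List (List Int)) (i : Nat) (M : List (List Int)) (B usedM usedS : List Int)
      (supp : Int) (used : List Int) (pending : List Nat)
      (M1 : List (List Int)) (B1 uM uS : List Int) (s1 : Int)
      (M2 : List (List Int)) (B2 uM2 : List Int) (s2 : Int) (pd : List Nat),
      (∀ eq ∈ eqs, eq ≠ [] ∧ ∀ c ∈ eq, 0 ≤ c ∧ c < nb_cols) →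
      usedM.length = nb_rows.toNat → usedS.length = nb_rows.toNat →
      i + eqs.length ≤ nb_rows.toNat →
      (∀ x : Int, 0 ≤ x → (usedM.getD x.toNat 0 ≠ 0 ↔ x ∈ used)) →
      (∀ x ∈ used, 0 ≤ x ∧ x < nb_rows) →
      used.Nodup →
      0 ≤ supp →
      (∀ x ∈ used, x < nb_cols ∨ (nb_cols ≤ x ∧ x < nb_cols + supp)) →
      pending = (List.range i).filter (fun j => usedS.getD j 0 == 0) →
      (∀ j : Nat, i ≤ j → usedS.getD j 0 = 0) →
      used.length + pending.length = i →
      pvLoop1A nb_cols nb_rows output i eqs M B usedM usedS supp = (M1, B1, uM, uS, s1) →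
      pvMidLoop1 nb_cols nb_rows output i eqs M B usedM supp pending = (M2, B2, uM2, s2, pd) →
      M1 = M2 ∧ B1 = B2 ∧ uM = uM2 ∧
      uM.length = nb_rows.toNat ∧
      pd = (List.range (i + eqs.length)).filter (fun j => uS.getD j 0 == 0) ∧
      ∃ ud : List Int,
        (∀ x : Int, 0 ≤ x → (uM.getD x.toNat 0 ≠ 0 ↔ x ∈ ud)) ∧
        (∀ x ∈ ud, 0 ≤ x ∧ x < nb_rows) ∧ ud.Nodup ∧
        ud.length + pd.length = i + eqs.length := by
  intro eqs
  induction eqs with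
  | nil =>
      intro i M B usedM usedS supp used pending M1 B1 uM uS s1 M2 B2 uM2 s2 pd heqs hM hS hi
        hiff hbound hnd hsupp hstrat hpend hfresh hcount h1 h2
      simp only [pvLoop1A, Prod.mk.injEq] at h1
      simp only [pvMidLoop1, Prod.mk.injEq] at h2
      obtain ⟨rfl, rfl, rfl, rfl, rfl⟩ := h1
      obtain ⟨rfl, rfl, rfl, rfl, rfl⟩ := h2
      exact ⟨rfl, rfl, rfl, hM, by simpa using hpend, used, hiff, hbound, hnd,
        by simpa using hcount⟩
  | cons eq rest ih =>
      intro i M B usedM usedS supp used pending M1 B1 uM uS s1 M2 B2 uM2 s2 pd heqs hM hS hi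
        hiff hbound hnd hsupp hstrat hpend hfresh hcount h1 h2
      rw [List.forall_mem_cons] at heqs
      obtain ⟨⟨hne, hcol⟩, heqs'⟩ := heqs
      obtain ⟨m, hm⟩ : ∃ m, PySem.List.min? eq (fun x => x) = some m := by
        rcases Option.ne_none_iff_exists'.1
          (fun hn => hne ((PySem.List.min?_eq_none_iff eq (fun x => x)).1 hn)) with ⟨m, hm⟩
        exact ⟨m, hm⟩
      have hmmem : m ∈ eq := PySem.List.min?_mem hm
      obtain ⟨hm0, hmc⟩ := hcol m hmmem
      have hmR : m < nb_rows := lt_of_lt_of_le hmc hcols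
      have hmtn : m.toNat < usedM.length := by omega
      have hiS : i < usedS.length := by
        rw [hS]
        simp only [List.length_cons] at hi
        omega
      simp only [pvLoop1A] at h1
      simp only [pvMidLoop1] at h2
      rw [hm] at h1 h2
      simp only [Option.getD_some] at h1 h2
      have hiffm := hiff m hm0
      rw [← pv_getD_int usedM m 0 hm0] at hiffm
      have harith : i + (eq :: rest).length = (i + 1) + rest.length := by
        simp [List.length_cons]
        omega
      have hi' : (i + 1) + rest.length ≤ nb_rows.toNat := by
        simp only [List.length_cons] at hi
        omega
      by_cases hmem : m ∈ used
      · have hA : ¬ PySem.List.pyGetD usedM m 0 = 0 := fun h0 => by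
          rw [h0] at hiffm
          exact absurd (hiffm.2 hmem) (by simp)
        rw [if_neg hA] at h1 h2
        by_cases hsc : supp < nb_rows - nb_cols
        · rw [if_pos hsc] at h1 h2
          set row : Int := nb_cols + supp with hrowdef
          have hrow0 : 0 ≤ row := by omega
          have hrowR : row < nb_rows := by omega
          have hrowtn : row.toNat < usedM.length := by omega
          have hrowmem : row ∉ used := by
            intro hcm
            rcases hstrat row hcm with h' | ⟨h1', h2'⟩ <;> omega
          have key := ih (i + 1) (pvCopyEq M row eq)
            (PySem.List.pySetD B row (PySem.List.pyGetD output (i : Int) 0))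
            (PySem.List.pySetD usedM row 1) (PySem.List.pySetD usedS (i : Int) 1)
            (supp + 1) (used ++ [row]) pending M1 B1 uM uS s1 M2 B2 uM2 s2 pd
            heqs' (by rw [PySem.List.length_pySetD]; exact hM)
            (by rw [PySem.List.length_pySetD]; exact hS) hi'
            ?_ ?_ ?_ (by omega) ?_ ?_ ?_ ?_ h1 h2
          · obtain ⟨c1, c2, c3, c4, c5, c6⟩ := key
            refine ⟨c1, c2, c3, c4, ?_, ?_⟩
            · rw [harith]; exact c5
            · rw [harith]; exact c6
          · intro x hx
            rw [PySem.List.pySetD_of_nonneg usedM 1 hrow0]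
            by_cases hxm : x = row
            · subst hxm
              rw [pv_getD_set_self _ _ _ _ hrowtn]
              simp
            · have hne' : row.toNat ≠ x.toNat := by omega
              rw [pv_getD_set_ne _ _ _ _ _ hne', List.mem_append, List.mem_singleton]
              simp only [hxm, or_false]
              exact hiff x hx
          · intro x hx
            rcases List.mem_append.1 hx with hx | hx
            · exact hbound x hx
            · rw [List.mem_singleton] at hx
              subst hx
              exact ⟨hrow0, hrowR⟩
          · simp [List.nodup_append, hnd]
            exact fun a ha h' => hrowmem (h' ▸ ha)
          · intro x hx
            rcases List.mem_append.1 hx with hx | hx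
            · rcases hstrat x hx with h' | ⟨h1', h2'⟩
              · exact Or.inl h'
              · exact Or.inr ⟨h1', by omega⟩
            · rw [List.mem_singleton] at hx
              subst hx
              exact Or.inr ⟨by omega, by omega⟩
          · rw [PySem.List.pySetD_natCast, List.range_succ, List.filter_append]
            have e1 : (List.range i).filter (fun j => (usedS.set i 1).getD j 0 == 0) = pending := by
              rw [hpend]
              apply List.filter_congr
              intro j hj
              rw [pv_getD_set_ne _ _ _ _ _ (by have := List.mem_range.1 hj; omega)]
            have e2 : [i].filter (fun j => (usedS.set i 1).getD j 0 == 0) = [] := by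
              simp only [List.filter_cons, List.filter_nil, pv_getD_set_self usedS i 1 0 hiS]
              simp
            rw [e1, e2, List.append_nil]
          · intro j hj
            rw [PySem.List.pySetD_natCast, pv_getD_set_ne _ _ _ _ _ (by omega)]
            exact hfresh j (by omega)
          · rw [List.length_append]
            simp only [List.length_cons, List.length_nil]
            omega
        · rw [if_neg hsc] at h1 h2
          have key := ih (i + 1) M B usedM usedS supp used (pending ++ [i])
            M1 B1 uM uS s1 M2 B2 uM2 s2 pd
            heqs' hM hS hi' hiff hbound hnd hsupp hstrat
            ?_ (fun j hj => hfresh j (by omega))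
            (by rw [List.length_append]; simp only [List.length_singleton]; omega) h1 h2
          · obtain ⟨c1, c2, c3, c4, c5, c6⟩ := key
            refine ⟨c1, c2, c3, c4, ?_, ?_⟩
            · rw [harith]; exact c5
            · rw [harith]; exact c6
          · rw [List.range_succ, List.filter_append, ← hpend]
            have e2 : [i].filter (fun j => usedS.getD j 0 == 0) = [i] := by
              simp only [List.filter_cons, List.filter_nil, hfresh i le_rfl]
              simp
            rw [e2]
      · have hA : PySem.List.pyGetD usedM m 0 = 0 := by
          by_contra hh
          exact hmem (hiffm.1 hh)
        rw [if_pos hA] at h1 h2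
        have key := ih (i + 1) (pvCopyEq M m eq)
          (PySem.List.pySetD B m (PySem.List.pyGetD output (i : Int) 0))
          (PySem.List.pySetD usedM m 1) (PySem.List.pySetD usedS (i : Int) 1)
          supp (used ++ [m]) pending M1 B1 uM uS s1 M2 B2 uM2 s2 pd
          heqs' (by rw [PySem.List.length_pySetD]; exact hM)
          (by rw [PySem.List.length_pySetD]; exact hS) hi'
          ?_ ?_ ?_ hsupp ?_ ?_ ?_ ?_ h1 h2
        · obtain ⟨c1, c2, c3, c4, c5, c6⟩ := key
          refine ⟨c1, c2, c3, c4, ?_, ?_⟩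
          · rw [harith]; exact c5
          · rw [harith]; exact c6
        · intro x hx
          rw [PySem.List.pySetD_of_nonneg usedM 1 hm0]
          by_cases hxm : x = m
          · subst hxm
            rw [pv_getD_set_self _ _ _ _ hmtn]
            simp
          · have hne' : m.toNat ≠ x.toNat := by omega
            rw [pv_getD_set_ne _ _ _ _ _ hne', List.mem_append, List.mem_singleton]
            simp only [hxm, or_false]
            exact hiff x hx
        · intro x hx
          rcases List.mem_append.1 hx with hx | hx
          · exact hbound x hx
          · rw [List.mem_singleton] at hx
            subst hx
            exact ⟨hm0, hmR⟩
        · simp [List.nodup_append, hnd]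
          exact fun a ha h' => hmem (h' ▸ ha)
        · intro x hx
          rcases List.mem_append.1 hx with hx | hx
          · rcases hstrat x hx with h' | ⟨h1', h2'⟩
            · exact Or.inl h'
            · exact Or.inr ⟨h1', by omega⟩
          · rw [List.mem_singleton] at hx
            subst hx
            exact Or.inl hmc
        · rw [PySem.List.pySetD_natCast, List.range_succ, List.filter_append]
          have e1 : (List.range i).filter (fun j => (usedS.set i 1).getD j 0 == 0) = pending := by
            rw [hpend]
            apply List.filter_congr
            intro j hj
            rw [pv_getD_set_ne _ _ _ _ _ (by have := List.mem_range.1 hj; omega)]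
          have e2 : [i].filter (fun j => (usedS.set i 1).getD j 0 == 0) = [] := by
            simp only [List.filter_cons, List.filter_nil, pv_getD_set_self usedS i 1 0 hiS]
            simp
          rw [e1, e2, List.append_nil]
        · intro j hj
          rw [PySem.List.pySetD_natCast, pv_getD_set_ne _ _ _ _ _ (by omega)]
          exact hfresh j (by omega)
        · rw [List.length_append]
          simp only [List.length_cons, List.length_nil]
          omega

-- A equals the intermediate program on Pre_
theorem pv_A_eq_mid (system : List (List Int)) (output : List Int) (nb_cols : Int)
    (hsys : ∀ eq ∈ system, eq ≠ [] ∧ ∀ c ∈ eq, 0 ≤ c ∧ c < nb_cols)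
    (hlen : (system.length : Int) ≤ (output.length : Int)) (hsysE : system ≠ []) :
    build_binary_matrix_optimized system output nb_cols = pvMid system output nb_cols := by
  obtain ⟨eq0, hmem0⟩ := List.exists_mem_of_ne_nil system hsysE
  obtain ⟨hne0, hcol0⟩ := hsys eq0 hmem0
  obtain ⟨c, hc⟩ := List.exists_mem_of_ne_nil eq0 hne0
  have hnb : (0 : Int) ≤ nb_cols := le_of_lt (lt_of_le_of_lt (hcol0 c hc).1 (hcol0 c hc).2)
  simp only [build_binary_matrix_optimized, pvMid]
  set R : Int := max (system.length : Int) nb_cols with hR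
  have hRn : (system.length : Int) ≤ R := le_max_left _ _
  have hRc : nb_cols ≤ R := le_max_right _ _
  have hR0 : (0 : Int) ≤ R := le_trans (Int.natCast_nonneg _) hRn
  have hnR : system.length ≤ R.toNat := by omega
  rcases h1 : pvLoop1A nb_cols R output 0 system
      (List.replicate R.toNat (List.replicate nb_cols.toNat (0 : Int)))
      (List.replicate R.toNat (0 : Int)) (List.replicate R.toNat (0 : Int))
      (List.replicate R.toNat (0 : Int)) 0 with ⟨M1, B1, uM, uS, s1⟩
  rcases h2 : pvMidLoop1 nb_cols R output 0 system
      (List.replicate R.toNat (List.replicate nb_cols.toNat (0 : Int)))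
      (List.replicate R.toNat (0 : Int)) (List.replicate R.toNat (0 : Int)) 0 []
      with ⟨M2, B2, uM2, s2, pd⟩
  have hZlen : (List.replicate R.toNat (0 : Int)).length = R.toNat := List.length_replicate
  have init := pv_sim1 nb_cols R output hnb hRc system 0
    (List.replicate R.toNat (List.replicate nb_cols.toNat (0 : Int)))
    (List.replicate R.toNat (0 : Int)) (List.replicate R.toNat (0 : Int))
    (List.replicate R.toNat (0 : Int)) 0 [] []
    M1 B1 uM uS s1 M2 B2 uM2 s2 pd
    hsys hZlen hZlen (by simpa using hnR)
    (by intro x hx; simp)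
    (by intro x hx; simp at hx)
    List.nodup_nil le_rfl
    (by intro x hx; simp at hx)
    (by simp)
    (by intro j hj; simp)
    rfl h1 h2
  obtain ⟨hM12, hB12, hUeq, huM, hpd, ud, hiff', hbound', hnd', hcnt⟩ := init
  have hlenInt : ((uM.length : Nat) : Int) = R := by omega
  rw [← hM12, ← hB12, ← hUeq]
  have hfrees : (PySem.List.pyRange 0 R 1).filter (fun r => PySem.List.pyGetD uM r 0 == 0) =
      pvFreesI uM 0 := by
    unfold pvFreesI
    rw [hlenInt]
  have hpends0 : pvPends uS 0 system.length = pd := by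
    unfold pvPends
    rw [← List.range_eq_range']
    simpa using hpd.symm
  have hflagperm : List.Perm ((PySem.List.pyRange 0 ((uM.length : Nat) : Int) 1).filter
      (fun r => !(PySem.List.pyGetD uM r 0 == 0))) ud := by
    apply (List.perm_ext_iff_of_nodup (List.Nodup.filter _ (PySem.List.nodup_pyRange_one _ _)) hnd').2
    intro a
    constructor
    · intro ha
      have hmf := List.mem_filter.1 ha
      have hr' := PySem.List.mem_pyRange_one.1 hmf.1
      have hb := hmf.2
      rw [pv_getD_int uM a 0 hr'.1] at hb
      simp only [Bool.not_eq_eq_eq_not, Bool.not_true, beq_eq_false_iff_ne, ne_eq] at hb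
      exact (hiff' a hr'.1).1 hb
    · intro ha
      obtain ⟨h0a, haR⟩ := hbound' a ha
      refine List.mem_filter.2 ⟨PySem.List.mem_pyRange_one.2 ⟨h0a, by omega⟩, ?_⟩
      rw [pv_getD_int uM a 0 h0a, beq_eq_false_iff_ne.2 ((hiff' a h0a).2 ha)]
      rfl
  have hsplit := List.length_eq_length_filter_add
    (l := PySem.List.pyRange 0 ((uM.length : Nat) : Int) 1)
    (fun r => PySem.List.pyGetD uM r 0 == 0)
  have hlenpy : (PySem.List.pyRange 0 ((uM.length : Nat) : Int) 1).length = R.toNat := by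
    rw [PySem.List.length_pyRange_one]
    omega
  have hfreelen : pd.length ≤ (pvFreesI uM 0).length := by
    have hp := hflagperm.length_eq
    unfold pvFreesI
    rw [hlenInt] at hsplit hlenpy hp ⊢
    omega
  rw [hfrees, ← hpends0]
  exact pv_sim2 system output system 0 M1 B1 uM uS 0 (by simp) le_rfl
    (by rw [hpends0]; exact hfreelen)

-- ---- declarative description of the greedy row assignment ----
def pvPrimB (mins : List Int) (j : Nat) : Bool := !((mins.take j).contains (mins.getD j 0))

def pvDups (mins : List Int) (n : Nat) : List Nat := (List.range n).filter (fun j => !pvPrimB mins j)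

def pvDupC (mins : List Int) (i : Nat) : Nat := (pvDups mins i).length

def pvRowOf1 (mins : List Int) (nb_cols cap : Int) (i : Nat) : Option Int :=
  if pvPrimB mins i then some (mins.getD i 0)
  else if (pvDupC mins i : Int) < cap then some (nb_cols + (pvDupC mins i : Int)) else none

def pvP (mins : List Int) (nb_cols cap : Int) (i : Nat) : List (Int × Int) :=
  (List.range i).filterMap (fun j => (pvRowOf1 mins nb_cols cap j).map (fun r => (r, (j : Int))))

-- first-match lookup in an association list (proof-side mirror of B's hits)
def pvLk (r : Int) : List (Int × Int) → Option Int
  | [] => none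
  | p :: t => if p.1 = r then some p.2 else pvLk r t

def pvVal1 (system : List (List Int)) (nb_cols : Int) : Option Int → List Int
  | some j => pvRowContent nb_cols (PySem.List.pyGetD system j [])
  | none => List.replicate nb_cols.toNat 0

def pvVal2 (output : List Int) : Option Int → Int
  | some j => PySem.List.pyGetD output j 0
  | none => 0

theorem pvLk_append (r : Int) (l1 l2 : List (Int × Int)) :
    pvLk r (l1 ++ l2) = (pvLk r l1).or (pvLk r l2) := by
  induction l1 with
  | nil => simp [pvLk]
  | cons p t ih =>
      by_cases hp : p.1 = r
      · simp [pvLk, hp]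
      · simp [pvLk, hp, ih]

theorem pvLk_eq_none_iff (r : Int) (l : List (Int × Int)) :
    pvLk r l = none ↔ r ∉ l.map Prod.fst := by
  induction l with
  | nil => simp [pvLk]
  | cons p t ih =>
      by_cases hp : p.1 = r
      · simp [pvLk, hp]
      · simp only [pvLk, if_neg hp, List.map_cons, List.mem_cons, ih]
        constructor
        · intro h hc
          rcases hc with hc | hc
          · exact hp hc.symm
          · exact h hc
        · intro h hc
          exact h (Or.inr hc)

theorem pvLk_mem (r v : Int) (l : List (Int × Int)) (h : pvLk r l = some v) : (r, v) ∈ l := by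
  induction l with
  | nil => simp [pvLk] at h
  | cons p t ih =>
      by_cases hp : p.1 = r
      · rw [pvLk, if_pos hp] at h
        cases h
        have : p = (r, p.2) := by
          cases p
          simp at hp ⊢
          exact hp
        rw [← this]
        exact List.mem_cons_self
      · rw [pvLk, if_neg hp] at h
        exact List.mem_cons_of_mem _ (ih h)

theorem pv_keys_unique (l : List (Int × Int)) (h : (l.map Prod.fst).Nodup) (r v w : Int)
    (h1 : (r, v) ∈ l) (h2 : (r, w) ∈ l) : v = w := by
  induction l with
  | nil => simp at h1
  | cons p t ih =>
      simp only [List.map_cons, List.nodup_cons] at h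
      rcases List.mem_cons.1 h1 with e1 | m1 <;> rcases List.mem_cons.1 h2 with e2 | m2
      · exact congrArg Prod.snd (e1.trans e2.symm)
      · exact absurd (List.mem_map.2 ⟨(r, w), m2, rfl⟩) (by rw [← e1] at h; exact h.1)
      · exact absurd (List.mem_map.2 ⟨(r, v), m1, rfl⟩) (by rw [← e2] at h; exact h.1)
      · exact ih h.2 m1 m2

theorem pv_lookup_ext (l1 l2 : List (Int × Int)) (hm : ∀ p, p ∈ l1 ↔ p ∈ l2)
    (h1 : (l1.map Prod.fst).Nodup) (h2 : (l2.map Prod.fst).Nodup) (r : Int) :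
    pvLk r l1 = pvLk r l2 := by
  rcases hv : pvLk r l1 with _ | v
  · rcases hw : pvLk r l2 with _ | w
    · rfl
    · exact absurd (List.mem_map.2 ⟨(r, w), (hm _).2 (pvLk_mem _ _ _ hw), rfl⟩)
        ((pvLk_eq_none_iff r l1).1 hv)
  · have hmem : (r, v) ∈ l2 := (hm _).1 (pvLk_mem _ _ _ hv)
    rcases hw : pvLk r l2 with _ | w
    · exact absurd (List.mem_map.2 ⟨(r, v), hmem, rfl⟩) ((pvLk_eq_none_iff r l2).1 hw)
    · rw [pv_keys_unique l2 h2 r v w hmem (pvLk_mem _ _ _ hw)]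

-- B's hits-head match is first-match lookup
theorem pv_hits_match {α : Type} (l : List (Int × Int)) (r : Int) (z : α) (g : Int → α) :
    (match l.filterMap (fun p => if p.1 == r then some p.2 else none) with
     | [] => z | i :: _ => g i) =
    (match pvLk r l with | none => z | some i => g i) := by
  induction l with
  | nil => simp [pvLk]
  | cons p t ih =>
      by_cases hp : p.1 = r
      · simp [pvLk, hp]
      · rw [List.filterMap_cons_none (by simp [hp])]
        rw [ih, pvLk, if_neg hp]

-- generic getD/set helpers (rows of M are lists)
theorem pv_getDg_set_ne {α : Type} (xs : List α) (i j : Nat) (v : α) (d : α) (h : i ≠ j) :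
    (xs.set i v).getD j d = xs.getD j d := by
  simp [List.getD_eq_getElem?_getD, h]

theorem pv_getDg_set_self {α : Type} (xs : List α) (i : Nat) (v : α) (d : α) (h : i < xs.length) :
    (xs.set i v).getD i d = v := by
  simp [List.getD_eq_getElem?_getD, h]

def pvTog (row : List Int) (c : Int) : List Int :=
  PySem.List.pySetD row c (PySem.Int.bxor (PySem.List.pyGetD row c 0) 1)

theorem pv_rowContent_eq (nb_cols : Int) (eq : List Int) :
    pvRowContent nb_cols eq = eq.foldl pvTog (List.replicate nb_cols.toNat 0) := rfl

theorem pv_copyEq_length (eq : List Int) : ∀ (M : List (List Int)) (r : Int),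
    (pvCopyEq M r eq).length = M.length := by
  induction eq with
  | nil => intro M r; rfl
  | cons c cs ih =>
      intro M r
      show (pvCopyEq (pvXorAt M r c) r cs).length = M.length
      rw [ih]
      unfold pvXorAt
      exact PySem.List.length_pySetD _ _ _

theorem pv_copyEq_getD (eq : List Int) : ∀ (M : List (List Int)) (r : Int), 0 ≤ r →
    r < (M.length : Int) → ∀ s : Nat, s < M.length →
    (pvCopyEq M r eq).getD s [] =
      if (s : Int) = r then eq.foldl pvTog (M.getD s []) else M.getD s [] := by
  induction eq with
  | nil =>
      intro M r h0 hlt s hs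
      show M.getD s [] = _
      split_ifs <;> rfl
  | cons c cs ih =>
      intro M r h0 hlt s hs
      have hrN : r.toNat < M.length := by omega
      have hM' : pvXorAt M r c = M.set r.toNat (pvTog (M.getD r.toNat []) c) := by
        unfold pvXorAt pvTog
        rw [PySem.List.pySetD_of_nonneg M _ h0]
        congr 2 <;>
          rw [show PySem.List.pyGetD M r [] = M.getD r.toNat [] by
            rw [← Int.toNat_of_nonneg h0, PySem.List.pyGetD_natCast, Int.toNat_natCast]]
      show (pvCopyEq (pvXorAt M r c) r cs).getD s [] = _
      rw [hM']
      have hlen : (M.set r.toNat (pvTog (M.getD r.toNat []) c)).length = M.length := by simp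
      rw [ih _ r h0 (by rw [hlen]; exact hlt) s (by rw [hlen]; exact hs)]
      by_cases hsr : (s : Int) = r
      · have hsn : s = r.toNat := by omega
        rw [if_pos hsr, if_pos hsr, hsn, pv_getDg_set_self _ _ _ _ hrN]
        rfl
      · have hsn : r.toNat ≠ s := by omega
        rw [if_neg hsr, if_neg hsr, pv_getDg_set_ne _ _ _ _ _ hsn]

theorem pv_prim_iff (mins : List Int) (j : Nat) :
    pvPrimB mins j = true ↔ mins.getD j 0 ∉ mins.take j := by
  unfold pvPrimB
  simp

theorem pv_mem_take_iff (mins : List Int) : ∀ (i : Nat), i ≤ mins.length → ∀ m : Int,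
    (m ∈ mins.take i ↔ ∃ j, j < i ∧ pvPrimB mins j = true ∧ mins.getD j 0 = m) := by
  intro i
  induction i with
  | zero => intro _ m; simp
  | succ i ih =>
      intro hi m
      have hil : i < mins.length := by omega
      rw [List.take_succ_eq_append_getElem hil, List.mem_append, List.mem_singleton,
        ih (by omega) m]
      constructor
      · rintro (⟨j, hj, hp, he⟩ | he)
        · exact ⟨j, by omega, hp, he⟩
        · by_cases hpi : pvPrimB mins i = true
          · exact ⟨i, by omega, hpi, by rw [List.getD_eq_getElem?_getD,
              List.getElem?_eq_getElem hil]; simp [he]⟩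
          · have : mins.getD i 0 ∈ mins.take i := by
              by_contra hc
              exact hpi ((pv_prim_iff mins i).2 hc)
            rw [List.getD_eq_getElem?_getD, List.getElem?_eq_getElem hil] at this
            simp only [Option.getD_some] at this
            rw [← he] at this
            rcases (ih (by omega) m).1 this with ⟨j, hj, hp, hm⟩
            exact ⟨j, by omega, hp, hm⟩
      · rintro ⟨j, hj, hp, he⟩
        by_cases hji : j < i
        · exact Or.inl ⟨j, hji, hp, he⟩
        · have : j = i := by omega
          subst this
          right
          rw [List.getD_eq_getElem?_getD, List.getElem?_eq_getElem hil] at he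
          simpa using he.symm

theorem pv_dupC_succ (mins : List Int) (i : Nat) :
    pvDupC mins (i+1) = pvDupC mins i + (if pvPrimB mins i then 0 else 1) := by
  unfold pvDupC pvDups
  rw [List.range_succ, List.filter_append]
  simp only [List.filter_cons, List.filter_nil, List.length_append]
  by_cases h : pvPrimB mins i <;> simp [h]

theorem pv_dupC_mono (mins : List Int) (i j : Nat) : i ≤ j → pvDupC mins i ≤ pvDupC mins j := by
  induction j with
  | zero =>
      intro h
      have : i = 0 := by omega
      subst this
      exact le_refl _
  | succ j ih =>
      intro h
      by_cases hij : i = j + 1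
      · subst hij
        exact le_refl _
      · have hs := pv_dupC_succ mins j
        have h2 := ih (by omega)
        split_ifs at hs <;> omega

theorem pv_P_succ (mins : List Int) (nb_cols cap : Int) (i : Nat) :
    pvP mins nb_cols cap (i+1) =
      pvP mins nb_cols cap i ++
        ((pvRowOf1 mins nb_cols cap i).map (fun r => (r, (i : Int)))).toList := by
  unfold pvP
  rw [List.range_succ, List.filterMap_append]
  rcases h : pvRowOf1 mins nb_cols cap i with _ | r <;>
    simp [List.filterMap_cons, h]

theorem pv_mem_P (mins : List Int) (nb_cols cap : Int) (i : Nat) (p : Int × Int) :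
    p ∈ pvP mins nb_cols cap i ↔
      ∃ j : Nat, j < i ∧ pvRowOf1 mins nb_cols cap j = some p.1 ∧ p.2 = (j : Int) := by
  unfold pvP
  rw [List.mem_filterMap]
  constructor
  · rintro ⟨j, hj, hf⟩
    rw [List.mem_range] at hj
    rcases h : pvRowOf1 mins nb_cols cap j with _ | r
    · rw [h] at hf; simp at hf
    · rw [h] at hf
      simp only [Option.map_some, Option.some.injEq] at hf
      exact ⟨j, hj, by rw [h, ← hf], by rw [← hf]⟩
  · rintro ⟨j, hj, hf, hp⟩
    refine ⟨j, List.mem_range.2 hj, ?_⟩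
    rw [hf, Option.map_some]
    cases p with
    | mk a b =>
        simp only [Option.some.injEq, Prod.mk.injEq]
        refine ⟨?_, hp.symm⟩
        simpa using congrArg (fun o => o.getD 0) hf.symm

theorem pv_keys_P (mins : List Int) (nb_cols cap : Int) (i : Nat) :
    (pvP mins nb_cols cap i).map Prod.fst =
      (List.range i).filterMap (pvRowOf1 mins nb_cols cap) := by
  unfold pvP
  rw [List.map_filterMap]
  congr 1
  funext j
  rcases h : pvRowOf1 mins nb_cols cap j <;> simp [h]

theorem pv_rowOf1_inj (mins : List Int) (nb_cols cap : Int)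
    (hmlt : ∀ j, j < mins.length → 0 ≤ mins.getD j 0 ∧ mins.getD j 0 < nb_cols) :
    ∀ j1 j2 : Nat, j1 < mins.length → j2 < mins.length → ∀ r : Int,
      pvRowOf1 mins nb_cols cap j1 = some r → pvRowOf1 mins nb_cols cap j2 = some r →
      j1 = j2 := by
  have key : ∀ j1 j2 : Nat, j1 < j2 → j2 < mins.length → ∀ r : Int,
      pvRowOf1 mins nb_cols cap j1 = some r → pvRowOf1 mins nb_cols cap j2 = some r → False := by
    intro j1 j2 hlt hl2 r h1 h2
    unfold pvRowOf1 at h1 h2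
    by_cases hp1 : pvPrimB mins j1 <;> by_cases hp2 : pvPrimB mins j2
    · rw [if_pos hp1] at h1
      rw [if_pos hp2] at h2
      have : mins.getD j2 0 ∈ mins.take j2 := by
        have hg : (mins.take j2)[j1]'(by simp; omega) = mins[j1] := List.getElem_take
        have : mins[j1] ∈ mins.take j2 := hg ▸ List.getElem_mem _
        rw [show mins[j1] = mins.getD j1 0 by
          rw [List.getD_eq_getElem?_getD, List.getElem?_eq_getElem (by omega)]; rfl] at this
        rw [Option.some.injEq] at h1 h2
        rw [h1, ← h2] at this
        exact this
      exact ((pv_prim_iff mins j2).1 hp2) this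
    · rw [if_pos hp1, Option.some.injEq] at h1
      rw [if_neg hp2] at h2
      by_cases hc : (pvDupC mins j2 : Int) < cap
      · rw [if_pos hc, Option.some.injEq] at h2
        have := (hmlt j1 (by omega)).2
        omega
      · rw [if_neg hc] at h2
        exact absurd h2 (by simp)
    · rw [if_neg hp1] at h1
      rw [if_pos hp2, Option.some.injEq] at h2
      by_cases hc : (pvDupC mins j1 : Int) < cap
      · rw [if_pos hc, Option.some.injEq] at h1
        have := (hmlt j2 hl2).2
        omega
      · rw [if_neg hc] at h1
        exact absurd h1 (by simp)
    · rw [if_neg hp1] at h1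
      rw [if_neg hp2] at h2
      by_cases hc1 : (pvDupC mins j1 : Int) < cap
      · rw [if_pos hc1, Option.some.injEq] at h1
        by_cases hc2 : (pvDupC mins j2 : Int) < cap
        · rw [if_pos hc2, Option.some.injEq] at h2
          have hmono := pv_dupC_mono mins (j1+1) j2 (by omega)
          have hstep := pv_dupC_succ mins j1
          rw [if_neg hp1] at hstep
          omega
        · rw [if_neg hc2] at h2
          exact absurd h2 (by simp)
      · rw [if_neg hc1] at h1
        exact absurd h1 (by simp)
  intro j1 j2 hl1 hl2 r h1 h2
  rcases Nat.lt_trichotomy j1 j2 with h | h | h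
  · exact (key j1 j2 h hl2 r h1 h2).elim
  · exact h
  · exact (key j2 j1 h hl1 r h2 h1).elim

theorem pv_fresh (mins : List Int) (nb_cols cap : Int)
    (hmlt : ∀ j, j < mins.length → 0 ≤ mins.getD j 0 ∧ mins.getD j 0 < nb_cols)
    (i : Nat) (hi : i < mins.length) (r : Int) (hr : pvRowOf1 mins nb_cols cap i = some r) :
    r ∉ (pvP mins nb_cols cap i).map Prod.fst := by
  intro hmem
  rw [pv_keys_P, List.mem_filterMap] at hmem
  rcases hmem with ⟨j, hj, hf⟩
  rw [List.mem_range] at hj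
  have := pv_rowOf1_inj mins nb_cols cap hmlt j i (by omega) hi r hf hr
  omega

theorem pv_keys_P_nodup (mins : List Int) (nb_cols cap : Int)
    (hmlt : ∀ j, j < mins.length → 0 ≤ mins.getD j 0 ∧ mins.getD j 0 < nb_cols) :
    ∀ (i : Nat), i ≤ mins.length → ((pvP mins nb_cols cap i).map Prod.fst).Nodup := by
  intro i
  induction i with
  | zero => intro _; simp [pvP]
  | succ i ih =>
      intro hi
      rw [pv_P_succ, List.map_append]
      rcases h : pvRowOf1 mins nb_cols cap i with _ | r
      · simpa using ih (by omega)
      · have hfr := pv_fresh mins nb_cols cap hmlt i (by omega) r h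
        simp only [Option.map_some, Option.toList_some, List.map_cons, List.map_nil]
        rw [List.nodup_append]
        refine ⟨ih (by omega), List.nodup_singleton _, ?_⟩
        intro x hx y hy
        rw [List.mem_singleton] at hy
        subst hy
        exact fun he => hfr (he ▸ hx)

theorem pv_dups_succ (mins : List Int) (i : Nat) :
    pvDups mins (i+1) = pvDups mins i ++ (if pvPrimB mins i then [] else [i]) := by
  unfold pvDups
  rw [List.range_succ, List.filter_append]
  by_cases h : pvPrimB mins i <;> simp [h]

-- for an in-range column value, occupancy of a diagonal row is first-occurrence membership
theorem pv_keys_take (mins : List Int) (nb_cols cap : Int) (i : Nat) (hi : i ≤ mins.length)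
    (m : Int) (hm : m < nb_cols) (hcap0 : 0 ≤ cap) :
    m ∈ (pvP mins nb_cols cap i).map Prod.fst ↔ m ∈ mins.take i := by
  rw [pv_keys_P, List.mem_filterMap, pv_mem_take_iff mins i hi m]
  constructor
  · rintro ⟨j, hj, hf⟩
    rw [List.mem_range] at hj
    unfold pvRowOf1 at hf
    by_cases hp : pvPrimB mins j
    · rw [if_pos hp, Option.some.injEq] at hf
      exact ⟨j, hj, hp, hf⟩
    · rw [if_neg hp] at hf
      by_cases hc : (pvDupC mins j : Int) < cap
      · rw [if_pos hc, Option.some.injEq] at hf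
        omega
      · rw [if_neg hc] at hf
        exact absurd hf (by simp)
  · rintro ⟨j, hj, hp, he⟩
    refine ⟨j, List.mem_range.2 hj, ?_⟩
    unfold pvRowOf1
    rw [if_pos hp, he]

theorem pv_char1 (system : List (List Int)) (output : List Int) (nb_cols R : Int)
    (mins : List Int) (hmins : mins = pvMins system) (cap : Int) (hcap : cap = R - nb_cols)
    (hsys : ∀ eq ∈ system, eq ≠ [] ∧ ∀ c ∈ eq, 0 ≤ c ∧ c < nb_cols)
    (hnb : 0 ≤ nb_cols) (hRn : (system.length : Int) ≤ R) (hRc : nb_cols ≤ R) :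
    ∀ (eqs : List (List Int)) (i : Nat) (M : List (List Int)) (B used : List Int)
      (supp : Int) (pending : List Nat),
      eqs = system.drop i → i ≤ system.length →
      M.length = R.toNat → B.length = R.toNat → used.length = R.toNat →
      (∀ r : Int, 0 ≤ r →
        (PySem.List.pyGetD used r 0 = 0 ↔ r ∉ (pvP mins nb_cols cap i).map Prod.fst)) →
      supp = min ((pvDupC mins i : Int)) cap →
      pending = (pvDups mins i).filter (fun j => decide (cap ≤ (pvDupC mins j : Int))) →
      (∀ p ∈ pvP mins nb_cols cap i,
        (0 ≤ p.1 ∧ p.1 < nb_cols) ∨ (nb_cols ≤ p.1 ∧ p.1 < nb_cols + supp)) →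
      (∀ s : Nat, s < R.toNat →
        M.getD s [] = pvVal1 system nb_cols (pvLk (s : Int) (pvP mins nb_cols cap i))) →
      (∀ s : Nat, s < R.toNat →
        B.getD s 0 = pvVal2 output (pvLk (s : Int) (pvP mins nb_cols cap i))) →
      ∃ M1 B1 used1,
        pvMidLoop1 nb_cols R output i eqs M B used supp pending =
          (M1, B1, used1, min ((pvDupC mins system.length : Int)) cap,
            (pvDups mins system.length).filter (fun j => decide (cap ≤ (pvDupC mins j : Int)))) ∧
        M1.length = R.toNat ∧ B1.length = R.toNat ∧ used1.length = R.toNat ∧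
        (∀ r : Int, 0 ≤ r →
          (PySem.List.pyGetD used1 r 0 = 0 ↔
            r ∉ (pvP mins nb_cols cap system.length).map Prod.fst)) ∧
        (∀ s : Nat, s < R.toNat →
          M1.getD s [] = pvVal1 system nb_cols (pvLk (s : Int) (pvP mins nb_cols cap system.length))) ∧
        (∀ s : Nat, s < R.toNat →
          B1.getD s 0 = pvVal2 output (pvLk (s : Int) (pvP mins nb_cols cap system.length))) := by
  have hmlen : mins.length = system.length := by rw [hmins]; exact List.length_map ..
  have hcap0 : 0 ≤ cap := by omega
  have hmlt : ∀ j, j < mins.length → 0 ≤ mins.getD j 0 ∧ mins.getD j 0 < nb_cols := by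
    intro j hj
    have hj' : j < system.length := by omega
    have : mins.getD j 0 = (PySem.List.min? system[j] (fun x => x)).getD 0 := by
      rw [hmins]
      unfold pvMins
      rw [List.getD_eq_getElem?_getD, List.getElem?_map, List.getElem?_eq_getElem hj']
      rfl
    obtain ⟨hne, hcol⟩ := hsys system[j] (List.getElem_mem _)
    obtain ⟨m, hm⟩ : ∃ m, PySem.List.min? system[j] (fun x => x) = some m := by
      rcases Option.ne_none_iff_exists'.1
        (fun hn => hne ((PySem.List.min?_eq_none_iff _ (fun x => x)).1 hn)) with ⟨m, hm⟩
      exact ⟨m, hm⟩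
    rw [this, hm, Option.getD_some]
    exact hcol m (PySem.List.min?_mem hm)
  intro eqs
  induction eqs with
  | nil =>
      intro i M B used supp pending hdrop hile hM hB hu hflag hsupp hpend hstrat hMc hBc
      have hin : i = system.length := by
        have := congrArg List.length hdrop
        simp [List.length_drop] at this
        omega
      subst hin
      exact ⟨M, B, used, by
        simp only [pvMidLoop1]
        rw [hsupp, hpend], hM, hB, hu, hflag, hMc, hBc⟩
  | cons eq rest ih =>
      intro i M B used supp pending hdrop hile hM hB hu hflag hsupp hpend hstrat hMc hBc
      have hi : i < system.length := by
        have := congrArg List.length hdrop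
        simp [List.length_drop] at this
        omega
      have hcons := List.drop_eq_getElem_cons hi
      rw [hcons] at hdrop
      obtain ⟨heq, hrest⟩ : eq = system[i] ∧ rest = system.drop (i + 1) := by
        constructor
        · exact ((List.cons.injEq _ _ _ _ ▸ hdrop.symm).1).symm
        · exact ((List.cons.injEq _ _ _ _ ▸ hdrop.symm).2).symm
      have hilen : i < mins.length := by omega
      have hR0 : (0 : Int) ≤ R := le_trans hnb hRc
      have hm : mins.getD i 0 = (PySem.List.min? eq (fun x => x)).getD 0 := by
        rw [hmins]
        unfold pvMins
        rw [List.getD_eq_getElem?_getD, List.getElem?_map, List.getElem?_eq_getElem hi]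
        simp [heq]
      obtain ⟨hm0, hmc⟩ : 0 ≤ (PySem.List.min? eq (fun x => x)).getD 0 ∧
          (PySem.List.min? eq (fun x => x)).getD 0 < nb_cols := by
        have := hmlt i hilen
        rw [hm] at this
        exact this
      set m : Int := (PySem.List.min? eq (fun x => x)).getD 0 with hmdef
      have hmR : m < R := by omega
      have hofg : PySem.List.pyGetD system (i : Int) [] = eq := by
        rw [PySem.List.pyGetD_natCast, List.getD_eq_getElem?_getD, List.getElem?_eq_getElem hi]
        simp [heq]
      have huInt : ((used.length : Nat) : Int) = R := by omega
      have hMInt : ((M.length : Nat) : Int) = R := by omega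
      have hBInt : ((B.length : Nat) : Int) = R := by omega
      have hktake := pv_keys_take mins nb_cols cap i (by omega) m hmc hcap0
      simp only [pvMidLoop1]
      by_cases hfm : PySem.List.pyGetD used m 0 = 0
      -- diagonal placement
      · have hnotin : m ∉ (pvP mins nb_cols cap i).map Prod.fst := (hflag m hm0).1 hfm
        have hprim : pvPrimB mins i = true := by
          rw [pv_prim_iff, hm]
          intro hc
          exact hnotin (hktake.2 hc)
        have hro : pvRowOf1 mins nb_cols cap i = some m := by
          unfold pvRowOf1
          rw [if_pos hprim, hm]
        have hP1 : pvP mins nb_cols cap (i+1) = pvP mins nb_cols cap i ++ [(m, (i : Int))] := by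
          rw [pv_P_succ, hro]
          rfl
        have hLkNone : pvLk m (pvP mins nb_cols cap i) = none :=
          (pvLk_eq_none_iff _ _).2 hnotin
        rw [if_pos hfm]
        refine ih (i+1) (pvCopyEq M m eq)
          (PySem.List.pySetD B m (PySem.List.pyGetD output (i : Int) 0))
          (PySem.List.pySetD used m 1) supp pending hrest (by omega)
          (by rw [pv_copyEq_length]; exact hM)
          (by rw [PySem.List.length_pySetD]; exact hB)
          (by rw [PySem.List.length_pySetD]; exact hu)
          ?_ ?_ ?_ ?_ ?_ ?_
        · intro r hr
          rw [pv_getD_set_int used m r 1 0 hm0 (by omega) hr, hP1, List.map_append]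
          by_cases hrm : r = m
          · subst hrm
            rw [if_pos rfl]
            constructor
            · intro hc
              exact absurd hc (by norm_num)
            · intro hc
              exact absurd (List.mem_append.2 (Or.inr (by simp))) hc
          · rw [if_neg hrm]
            rw [hflag r hr]
            constructor
            · intro hc hc2
              rcases List.mem_append.1 hc2 with h' | h'
              · exact hc h'
              · simp at h'
                exact hrm h'
            · intro hc hc2
              exact hc (List.mem_append.2 (Or.inl hc2))
        · rw [hsupp, pv_dupC_succ, if_pos hprim]
          norm_num
        · rw [hpend, pv_dups_succ, if_pos hprim, List.append_nil]
        · intro p hp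
          rw [hP1] at hp
          rcases List.mem_append.1 hp with h' | h'
          · exact hstrat p h'
          · rw [List.mem_singleton] at h'
            rw [h']
            exact Or.inl ⟨hm0, hmc⟩
        · intro s hs
          have hsM : s < M.length := by omega
          rw [pv_copyEq_getD eq M m hm0 (by omega) s hsM, hP1]
          by_cases hsm : (s : Int) = m
          · rw [if_pos hsm, hMc s hs, hsm, hLkNone, pvLk_append, hLkNone]
            show _ = pvVal1 system nb_cols (Option.or none (pvLk m [(m, (i : Int))]))
            rw [Option.none_or]
            show List.foldl pvTog (pvVal1 system nb_cols none) eq = _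
            show List.foldl pvTog (List.replicate nb_cols.toNat 0) eq = _
            rw [show pvLk m [(m, (i : Int))] = some (i : Int) by simp [pvLk]]
            show _ = pvRowContent nb_cols (PySem.List.pyGetD system (i : Int) [])
            rw [hofg, pv_rowContent_eq]
          · rw [if_neg hsm, hMc s hs, pvLk_append]
            rw [show pvLk (s : Int) [(m, (i : Int))] = none by simp [pvLk]; omega]
            rw [Option.or_none]
        · intro s hs
          have hsB : s < B.length := by omega
          rw [PySem.List.pySetD_of_nonneg B _ hm0]
          by_cases hsm : (s : Int) = m
          · have : s = m.toNat := by omega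
            subst this
            rw [pv_getDg_set_self _ _ _ _ (by omega), hP1, pvLk_append]
            rw [show pvLk ((m.toNat : Nat) : Int) (pvP mins nb_cols cap i) = none by
              rw [Int.toNat_of_nonneg hm0]; exact hLkNone]
            rw [show pvLk ((m.toNat : Nat) : Int) [(m, (i : Int))] = some (i : Int) by
              rw [Int.toNat_of_nonneg hm0]; simp [pvLk]]
            rfl
          · rw [pv_getDg_set_ne _ _ _ _ _ (by omega), hBc s hs, hP1, pvLk_append]
            rw [show pvLk (s : Int) [(m, (i : Int))] = none by simp [pvLk]; omega]
            rw [Option.or_none]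
      -- supplementary or pending
      · have hin : m ∈ (pvP mins nb_cols cap i).map Prod.fst := by
          by_contra hc
          exact hfm ((hflag m hm0).2 hc)
        have hnprim : pvPrimB mins i = false := by
          rw [Bool.eq_false_iff]
          intro hp
          rw [pv_prim_iff, hm] at hp
          exact hp (hktake.1 hin)
        rw [if_neg hfm]
        by_cases hsc : supp < R - nb_cols
        · -- supplementary placement
          have hsdc : supp = (pvDupC mins i : Int) ∧ (pvDupC mins i : Int) < cap := by
            rcases le_total ((pvDupC mins i : Int)) cap with h' | h'
            · rw [hsupp, min_eq_left h']
              constructor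
              · rfl
              · rw [hsupp, min_eq_left h'] at hsc
                omega
            · rw [hsupp, min_eq_right h'] at hsc ⊢
              omega
          set row : Int := nb_cols + supp with hrowdef
          have hrow0 : 0 ≤ row := by
            have : (0 : Int) ≤ (pvDupC mins i : Int) := Int.natCast_nonneg _
            omega
          have hrowR : row < R := by omega
          have hro : pvRowOf1 mins nb_cols cap i = some row := by
            unfold pvRowOf1
            rw [if_neg (by rw [hnprim]; exact Bool.false_ne_true), if_pos hsdc.2, hrowdef,
              hsdc.1]
          have hnotin : row ∉ (pvP mins nb_cols cap i).map Prod.fst := by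
            intro hc
            rcases List.mem_map.1 hc with ⟨p, hp, hfst⟩
            rcases hstrat p hp with h' | h' <;> omega
          have hP1 : pvP mins nb_cols cap (i+1) =
              pvP mins nb_cols cap i ++ [(row, (i : Int))] := by
            rw [pv_P_succ, hro]
            rfl
          have hLkNone : pvLk row (pvP mins nb_cols cap i) = none :=
            (pvLk_eq_none_iff _ _).2 hnotin
          rw [if_pos hsc]
          refine ih (i+1) (pvCopyEq M row eq)
            (PySem.List.pySetD B row (PySem.List.pyGetD output (i : Int) 0))
            (PySem.List.pySetD used row 1) (supp + 1) pending hrest (by omega)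
            (by rw [pv_copyEq_length]; exact hM)
            (by rw [PySem.List.length_pySetD]; exact hB)
            (by rw [PySem.List.length_pySetD]; exact hu)
            ?_ ?_ ?_ ?_ ?_ ?_
          · intro r hr
            rw [pv_getD_set_int used row r 1 0 hrow0 (by omega) hr, hP1, List.map_append]
            by_cases hrm : r = row
            · subst hrm
              rw [if_pos rfl]
              constructor
              · intro hc
                exact absurd hc (by norm_num)
              · intro hc
                exact absurd (List.mem_append.2 (Or.inr (by simp))) hc
            · rw [if_neg hrm, hflag r hr]
              constructor
              · intro hc hc2
                rcases List.mem_append.1 hc2 with h' | h'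
                · exact hc h'
                · simp at h'
                  exact hrm h'
              · intro hc hc2
                exact hc (List.mem_append.2 (Or.inl hc2))
          · rw [pv_dupC_succ, if_neg (by rw [hnprim]; exact Bool.false_ne_true)]
            push_cast
            omega
          · rw [hpend, pv_dups_succ, if_neg (by rw [hnprim]; exact Bool.false_ne_true),
              List.filter_append]
            rw [show ([i].filter (fun j => decide (cap ≤ (pvDupC mins j : Int)))) = [] by
              simp
              omega]
            rw [List.append_nil]
          · intro p hp
            rw [hP1] at hp
            rcases List.mem_append.1 hp with h' | h'
            · rcases hstrat p h' with h'' | h''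
              · exact Or.inl h''
              · exact Or.inr ⟨h''.1, by omega⟩
            · rw [List.mem_singleton] at h'
              rw [h']
              exact Or.inr ⟨by show nb_cols ≤ row; omega, by show row < nb_cols + (supp + 1); omega⟩
          · intro s hs
            have hsM : s < M.length := by omega
            rw [pv_copyEq_getD eq M row hrow0 (by omega) s hsM, hP1]
            by_cases hsm : (s : Int) = row
            · rw [if_pos hsm, hMc s hs, hsm, hLkNone, pvLk_append, hLkNone]
              show _ = pvVal1 system nb_cols (Option.or none (pvLk row [(row, (i : Int))]))
              rw [Option.none_or]
              show List.foldl pvTog (pvVal1 system nb_cols none) eq = _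
              show List.foldl pvTog (List.replicate nb_cols.toNat 0) eq = _
              rw [show pvLk row [(row, (i : Int))] = some (i : Int) by simp [pvLk]]
              show _ = pvRowContent nb_cols (PySem.List.pyGetD system (i : Int) [])
              rw [hofg, pv_rowContent_eq]
            · rw [if_neg hsm, hMc s hs, pvLk_append]
              rw [show pvLk (s : Int) [(row, (i : Int))] = none by simp [pvLk]; omega]
              rw [Option.or_none]
          · intro s hs
            have hsB : s < B.length := by omega
            rw [PySem.List.pySetD_of_nonneg B _ hrow0]
            by_cases hsm : (s : Int) = row
            · have : s = row.toNat := by omega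
              subst this
              rw [pv_getDg_set_self _ _ _ _ (by omega), hP1, pvLk_append]
              rw [show pvLk ((row.toNat : Nat) : Int) (pvP mins nb_cols cap i) = none by
                rw [Int.toNat_of_nonneg hrow0]; exact hLkNone]
              rw [show pvLk ((row.toNat : Nat) : Int) [(row, (i : Int))] = some (i : Int) by
                rw [Int.toNat_of_nonneg hrow0]; simp [pvLk]]
              rfl
            · rw [pv_getDg_set_ne _ _ _ _ _ (by omega), hBc s hs, hP1, pvLk_append]
              rw [show pvLk (s : Int) [(row, (i : Int))] = none by simp [pvLk]; omega]
              rw [Option.or_none]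
        · -- no room: defer to pending
          have hcdc : cap ≤ (pvDupC mins i : Int) ∧ supp = cap := by
            rcases le_total ((pvDupC mins i : Int)) cap with h' | h'
            · rw [hsupp, min_eq_left h'] at hsc ⊢
              omega
            · rw [hsupp, min_eq_right h']
              exact ⟨h', rfl⟩
          have hro : pvRowOf1 mins nb_cols cap i = none := by
            unfold pvRowOf1
            rw [if_neg (by rw [hnprim]; exact Bool.false_ne_true), if_neg (by omega)]
          have hP1 : pvP mins nb_cols cap (i+1) = pvP mins nb_cols cap i := by
            rw [pv_P_succ, hro]
            simp
          rw [if_neg hsc]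
          refine ih (i+1) M B used supp (pending ++ [i]) hrest (by omega) hM hB hu
            ?_ ?_ ?_ ?_ ?_ ?_
          · intro r hr
            rw [hP1]
            exact hflag r hr
          · rw [pv_dupC_succ, if_neg (by rw [hnprim]; exact Bool.false_ne_true)]
            rw [hcdc.2]
            push_cast
            omega
          · rw [hpend, pv_dups_succ, if_neg (by rw [hnprim]; exact Bool.false_ne_true),
              List.filter_append]
            rw [show ([i].filter (fun j => decide (cap ≤ (pvDupC mins j : Int)))) = [i] by
              simp
              omega]
          · intro p hp
            rw [hP1] at hp
            exact hstrat p hp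
          · intro s hs
            rw [hP1]
            exact hMc s hs
          · intro s hs
            rw [hP1]
            exact hBc s hs

theorem pv_char2 (system : List (List Int)) (output : List Int) (nb_cols : Int) :
    ∀ (pairs : List (Nat × Int)) (Q : List (Int × Int)) (M : List (List Int)) (B : List Int),
      (pairs.map Prod.snd).Nodup →
      (∀ q ∈ pairs, 0 ≤ q.2 ∧ q.2 < (M.length : Int) ∧ q.2 ∉ Q.map Prod.fst) →
      B.length = M.length →
      (∀ s : Nat, s < M.length → M.getD s [] = pvVal1 system nb_cols (pvLk (s : Int) Q)) →
      (∀ s : Nat, s < M.length → B.getD s 0 = pvVal2 output (pvLk (s : Int) Q)) →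
      ∃ M2 B2,
        pvMidLoop2 system output pairs M B = (M2, B2) ∧
        M2.length = M.length ∧ B2.length = M.length ∧
        (∀ s : Nat, s < M.length → M2.getD s [] =
          pvVal1 system nb_cols (pvLk (s : Int) (Q ++ pairs.map (fun q => (q.2, (q.1 : Int)))))) ∧
        (∀ s : Nat, s < M.length → B2.getD s 0 =
          pvVal2 output (pvLk (s : Int) (Q ++ pairs.map (fun q => (q.2, (q.1 : Int)))))) := by
  intro pairs
  induction pairs with
  | nil =>
      intro Q M B _ _ hBM hMc hBc
      exact ⟨M, B, rfl, rfl, hBM, by simpa using hMc, by simpa using hBc⟩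
  | cons q rest ih =>
      rcases q with ⟨j, row⟩
      intro Q M B hnd hfresh hBM hMc hBc
      obtain ⟨hrow0, hrowM, hrownot⟩ := hfresh (j, row) List.mem_cons_self
      simp only at hrow0 hrowM hrownot
      have hLkNone : pvLk row Q = none := (pvLk_eq_none_iff _ _).2 hrownot
      simp only [pvMidLoop2]
      have hlen' : (pvCopyEq M row (PySem.List.pyGetD system (j : Int) [])).length = M.length :=
        pv_copyEq_length _ _ _
      have hfresh' : ∀ q ∈ rest, 0 ≤ q.2 ∧
          q.2 < ((pvCopyEq M row (PySem.List.pyGetD system (j : Int) [])).length : Int) ∧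
          q.2 ∉ (Q ++ [(row, (j : Int))]).map Prod.fst := by
        intro p hp
        obtain ⟨h0, hM', hnot⟩ := hfresh p (List.mem_cons_of_mem _ hp)
        refine ⟨h0, by rw [hlen']; exact hM', ?_⟩
        rw [List.map_append, List.mem_append]
        rintro (hc | hc)
        · exact hnot hc
        · simp at hc
          simp only [List.map_cons, List.nodup_cons] at hnd
          exact hnd.1 (hc ▸ List.mem_map.2 ⟨p, hp, rfl⟩)
      have hMc' : ∀ s : Nat, s < (pvCopyEq M row (PySem.List.pyGetD system (j : Int) [])).length →
          (pvCopyEq M row (PySem.List.pyGetD system (j : Int) [])).getD s [] =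
            pvVal1 system nb_cols (pvLk (s : Int) (Q ++ [(row, (j : Int))])) := by
        intro s hs
        rw [hlen'] at hs
        rw [pv_copyEq_getD _ M row hrow0 hrowM s hs]
        by_cases hsm : (s : Int) = row
        · rw [if_pos hsm, hMc s hs, hsm, hLkNone, pvLk_append, hLkNone]
          show _ = pvVal1 system nb_cols (Option.or none (pvLk row [(row, (j : Int))]))
          rw [Option.none_or]
          show List.foldl pvTog (pvVal1 system nb_cols none) _ = _
          show List.foldl pvTog (List.replicate nb_cols.toNat 0) _ = _
          rw [show pvLk row [(row, (j : Int))] = some (j : Int) by simp [pvLk]]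
          show _ = pvRowContent nb_cols (PySem.List.pyGetD system (j : Int) [])
          rw [pv_rowContent_eq]
        · rw [if_neg hsm, hMc s hs, pvLk_append]
          rw [show pvLk (s : Int) [(row, (j : Int))] = none by simp [pvLk]; omega]
          rw [Option.or_none]
      have hBc' : ∀ s : Nat, s < (pvCopyEq M row (PySem.List.pyGetD system (j : Int) [])).length →
          (PySem.List.pySetD B row (PySem.List.pyGetD output (j : Int) 0)).getD s 0 =
            pvVal2 output (pvLk (s : Int) (Q ++ [(row, (j : Int))])) := by
        intro s hs
        rw [hlen'] at hs
        rw [PySem.List.pySetD_of_nonneg B _ hrow0]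
        by_cases hsm : (s : Int) = row
        · have : s = row.toNat := by omega
          subst this
          rw [pv_getDg_set_self _ _ _ _ (by omega), pvLk_append]
          rw [show pvLk ((row.toNat : Nat) : Int) Q = none by
            rw [Int.toNat_of_nonneg hrow0]; exact hLkNone]
          rw [show pvLk ((row.toNat : Nat) : Int) [(row, (j : Int))] = some (j : Int) by
            rw [Int.toNat_of_nonneg hrow0]; simp [pvLk]]
          rfl
        · rw [pv_getDg_set_ne _ _ _ _ _ (by omega), hBc s hs, pvLk_append]
          rw [show pvLk (s : Int) [(row, (j : Int))] = none by simp [pvLk]; omega]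
          rw [Option.or_none]
      obtain ⟨M2, B2, hrun, hl1, hl2, hc1, hc2⟩ := ih (Q ++ [(row, (j : Int))])
        (pvCopyEq M row (PySem.List.pyGetD system (j : Int) []))
        (PySem.List.pySetD B row (PySem.List.pyGetD output (j : Int) 0))
        (by simp only [List.map_cons, List.nodup_cons] at hnd; exact hnd.2)
        hfresh' (by rw [PySem.List.length_pySetD, hlen', hBM]) hMc' hBc'
      refine ⟨M2, B2, hrun, by rw [hl1, hlen'], by rw [hl2, hlen'], ?_, ?_⟩
      · intro s hs
        rw [hc1 s (by rw [hlen']; exact hs), List.append_assoc]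
        try rfl
      · intro s hs
        rw [hc2 s (by rw [hlen']; exact hs), List.append_assoc]
        try rfl

-- small list-algebra helpers for the B side
theorem pv_filterMap_if {α β : Type} (p : α → Bool) (f : α → β) (l : List α) :
    l.filterMap (fun a => if p a then some (f a) else none) = (l.filter p).map f := by
  induction l with
  | nil => rfl
  | cons x t ih =>
      by_cases h : p x <;> simp [List.filterMap_cons, List.filter_cons, h, ih]

theorem pv_filterMap_not {α β : Type} (p : α → Bool) (f : α → β) (l : List α) :
    l.filterMap (fun a => if p a then none else some (f a)) = (l.filter (fun a => !p a)).map f := by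
  induction l with
  | nil => rfl
  | cons x t ih =>
      by_cases h : p x <;> simp [List.filterMap_cons, List.filter_cons, h, ih]

theorem pv_zip_swap_cast (a : List Nat) : ∀ (b : List Int),
    (a.zip b).map (fun q => (q.2, (q.1 : Int))) = b.zip (a.map (fun j : Nat => (j : Int))) := by
  induction a with
  | nil => intro b; cases b <;> rfl
  | cons x t ih =>
      intro b
      cases b with
      | nil => rfl
      | cons y u =>
          simp only [List.map_cons, List.zip_cons_cons, List.map_cons, ih]

theorem pv_map_snd_zip {α β : Type} (a : List α) : ∀ (b : List β),
    (a.zip b).map Prod.snd = b.take a.length := by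
  induction a with
  | nil => intro b; simp
  | cons x t ih =>
      intro b
      cases b with
      | nil => simp
      | cons y u => simp [ih]

theorem pv_map_fst_zip {α β : Type} (a : List α) : ∀ (b : List β),
    (a.zip b).map Prod.fst = a.take b.length := by
  induction a with
  | nil => intro b; simp
  | cons x t ih =>
      intro b
      cases b with
      | nil => simp
      | cons y u => simp [ih]

theorem pv_filter_pos_drop (l : List Nat) : ∀ (q : Nat → Bool) (c : Nat),
    (∀ k (hk : k < l.length), q l[k] = decide (c ≤ k)) → l.filter q = l.drop c := by
  induction l with
  | nil => intro q c _; simp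
  | cons x t ih =>
      intro q c hq
      have h0 : q x = decide (c ≤ 0) := hq 0 (by simp)
      rw [List.filter_cons]
      cases c with
      | zero =>
          have hqx : q x = true := by rw [h0]; simp
          have ht : t.filter q = t := by
            apply List.filter_eq_self.2
            intro a ha
            obtain ⟨k, hk, hkj⟩ := List.mem_iff_getElem.1 ha
            have h2 := hq (k+1) (by simpa using Nat.succ_lt_succ hk)
            rw [List.getElem_cons_succ, hkj] at h2
            rw [h2]
            simp
          simp [hqx, ht]
      | succ c' =>
          rw [h0]
          simp only [decide_eq_true_eq]
          rw [if_neg (by omega)]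
          rw [List.drop_succ_cons]
          exact ih q c' (fun k hk => by
            have := hq (k+1) (by simpa using Nat.succ_lt_succ hk)
            simpa using this)

theorem pv_dups_getElem (mins : List Int) :
    ∀ (n : Nat) (k : Nat) (hk : k < (pvDups mins n).length),
      pvPrimB mins ((pvDups mins n)[k]) = false ∧
      pvDupC mins ((pvDups mins n)[k]) = k ∧ (pvDups mins n)[k] < n := by
  intro n
  induction n with
  | zero => intro k hk; simp [pvDups] at hk
  | succ n ih =>
      intro k hk
      by_cases hp : pvPrimB mins n
      · have he : pvDups mins (n+1) = pvDups mins n := by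
          rw [pv_dups_succ, if_pos hp, List.append_nil]
        simp only [he] at hk ⊢
        obtain ⟨a, b, c⟩ := ih k hk
        exact ⟨a, b, by omega⟩
      · have he : pvDups mins (n+1) = pvDups mins n ++ [n] := by
          rw [pv_dups_succ, if_neg (by rw [Bool.eq_false_iff.2 hp]; exact Bool.false_ne_true)]
        simp only [he] at hk ⊢
        by_cases hkl : k < (pvDups mins n).length
        · rw [List.getElem_append_left hkl]
          obtain ⟨a, b, c⟩ := ih k hkl
          exact ⟨a, b, by omega⟩
        · have hkeq : k = (pvDups mins n).length := by
            rw [List.length_append] at hk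
            simp at hk
            omega
          subst hkeq
          rw [List.getElem_append_right (le_refl _)]
          simp only [Nat.sub_self, List.getElem_singleton]
          exact ⟨Bool.eq_false_iff.2 hp, rfl, by omega⟩

theorem pv_dups_mem (mins : List Int) (n j : Nat) (hj : j < n) (hp : pvPrimB mins j = false) :
    ∃ k, ∃ (hk : k < (pvDups mins n).length), (pvDups mins n)[k] = j ∧ pvDupC mins j = k := by
  have hjm : j ∈ pvDups mins n := by
    unfold pvDups
    rw [List.mem_filter]
    exact ⟨List.mem_range.2 hj, by rw [hp]; rfl⟩
  obtain ⟨k, hk, hkj⟩ := List.mem_iff_getElem.1 hjm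
  obtain ⟨_, hdc, _⟩ := pv_dups_getElem mins n k hk
  exact ⟨k, hk, hkj, by rw [← hkj]; exact hdc⟩

-- the Python test  mins.index(mins[j]) == j  is exactly first-occurrence
theorem pv_index_test (mins : List Int) (j : Nat) (hj : j < mins.length) :
    pvAltTest mins ((j : Int), mins.getD j 0) = pvPrimB mins j := by
  have hgd : mins.getD j 0 = mins[j] := by
    rw [List.getD_eq_getElem?_getD, List.getElem?_eq_getElem hj]
    rfl
  have hmem : mins.getD j 0 ∈ mins := by
    rw [hgd]
    exact List.getElem_mem _
  rcases hidx : PySem.List.index? mins (mins.getD j 0) with _ | k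
  · exact absurd hmem (by
      have := (PySem.List.index?_eq_none_iff mins (mins.getD j 0)).1 hidx
      exact this)
  · obtain ⟨pre, suf, hsplit, hklen, hnotpre⟩ :=
      (PySem.List.index?_eq_some_iff mins (mins.getD j 0) k).1 hidx
    have hpre : pre = mins.take k := by
      rw [hsplit, ← hklen, List.take_left]
    have hklt : k < mins.length := by
      rw [hsplit]
      rw [List.length_append, List.length_cons]
      omega
    have hmk : mins[k] = mins.getD j 0 := by
      have h1 : mins[k]? = some (mins.getD j 0) := by
        obtain ⟨m, hm⟩ : ∃ m, mins.getD j 0 = m := ⟨_, rfl⟩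
        rw [hm] at hsplit ⊢
        rw [hsplit, List.getElem?_append_right (by omega), ← hklen]
        simp
      rw [List.getElem?_eq_getElem hklt] at h1
      simpa using h1
    have hkj : k ≤ j := by
      by_contra hc
      apply hnotpre
      rw [hpre]
      have hg : (mins.take k)[j]'(by simp; omega) = mins[j] := List.getElem_take
      rw [hgd]
      exact hg ▸ List.getElem_mem _
    unfold pvAltTest
    rw [hidx]
    simp only [Option.getD_some]
    by_cases hp : pvPrimB mins j = true
    · rw [hp]
      have hkeqj : k = j := by
        by_contra hc
        have hkj' : k < j := by omega
        rw [pv_prim_iff] at hp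
        apply hp
        have hg : (mins.take j)[k]'(by simp; omega) = mins[k] := List.getElem_take
        rw [← hmk]
        exact hg ▸ List.getElem_mem _
      subst hkeqj
      simp
    · rw [Bool.eq_false_iff.2 hp]
      have hne : k ≠ j := by
        intro hc
        subst hc
        apply hp
        rw [pv_prim_iff, ← hpre]
        exact hnotpre
      simp
      omega

theorem pv_alt_enum (mins : List Int) :
    PySem.List.enumerate mins =
      (List.range mins.length).map (fun j : Nat => ((j : Int), mins.getD j 0)) := by
  rw [PySem.List.enumerate_eq_map_pyRange mins 0]
  show List.map _ (PySem.List.pyRange 0 (mins.length : Int)) = _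
  rw [PySem.List.pyRange_zero_natCast, List.map_map]
  apply List.map_congr_left
  intro j _
  simp

theorem pv_alt_primaries_eq (mins : List Int) :
    pvAltPrimaries mins =
      ((List.range mins.length).filter (fun j => pvPrimB mins j)).map
        (fun j : Nat => (mins.getD j 0, (j : Int))) := by
  unfold pvAltPrimaries
  rw [pv_alt_enum, List.filterMap_map]
  rw [List.filterMap_congr (g := fun j : Nat =>
    if pvPrimB mins j then some (mins.getD j 0, (j : Int)) else none)
    (fun j hj => by
      simp only [Function.comp_apply]
      rw [pv_index_test mins j (List.mem_range.1 hj)])]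
  exact pv_filterMap_if _ _ _

theorem pv_alt_dups_eq (mins : List Int) :
    pvAltDups mins = (pvDups mins mins.length).map (fun j : Nat => (j : Int)) := by
  unfold pvAltDups pvDups
  rw [pv_alt_enum, List.filterMap_map]
  rw [List.filterMap_congr (g := fun j : Nat =>
    if pvPrimB mins j then none else some ((j : Nat) : Int))
    (fun j hj => by
      simp only [Function.comp_apply]
      rw [pv_index_test mins j (List.mem_range.1 hj)])]
  exact pv_filterMap_not _ _ _

theorem pv_mins_bounds (system : List (List Int)) (nb_cols : Int)
    (hsys : ∀ eq ∈ system, eq ≠ [] ∧ ∀ c ∈ eq, 0 ≤ c ∧ c < nb_cols) :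
    ∀ j, j < (pvMins system).length →
      0 ≤ (pvMins system).getD j 0 ∧ (pvMins system).getD j 0 < nb_cols := by
  intro j hj
  have hj' : j < system.length := by
    unfold pvMins at hj
    simpa using hj
  have hgd : (pvMins system).getD j 0 = (PySem.List.min? system[j] (fun x => x)).getD 0 := by
    unfold pvMins
    rw [List.getD_eq_getElem?_getD, List.getElem?_map, List.getElem?_eq_getElem hj']
    rfl
  obtain ⟨hne, hcol⟩ := hsys system[j] (List.getElem_mem _)
  obtain ⟨m, hm⟩ : ∃ m, PySem.List.min? system[j] (fun x => x) = some m := by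
    rcases Option.ne_none_iff_exists'.1
      (fun hn => hne ((PySem.List.min?_eq_none_iff _ (fun x => x)).1 hn)) with ⟨m, hm⟩
    exact ⟨m, hm⟩
  rw [hgd, hm, Option.getD_some]
  exact hcol m (PySem.List.min?_mem hm)

theorem pv_mid_eq_alt (system : List (List Int)) (output : List Int) (nb_cols : Int)
    (hsys : ∀ eq ∈ system, eq ≠ [] ∧ ∀ c ∈ eq, 0 ≤ c ∧ c < nb_cols)
    (hsysE : system ≠ []) :
    pvMid system output nb_cols = build_binary_matrix_optimized_alt system output nb_cols := by
  obtain ⟨eq0, hmem0⟩ := List.exists_mem_of_ne_nil system hsysE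
  obtain ⟨hne0, hcol0⟩ := hsys eq0 hmem0
  obtain ⟨c0, hc0⟩ := List.exists_mem_of_ne_nil eq0 hne0
  have hnb : (0 : Int) ≤ nb_cols := le_of_lt (lt_of_le_of_lt (hcol0 c0 hc0).1 (hcol0 c0 hc0).2)
  have hRn : (system.length : Int) ≤ max (system.length : Int) nb_cols := le_max_left _ _
  have hRc : nb_cols ≤ max (system.length : Int) nb_cols := le_max_right _ _
  have hR0 : (0 : Int) ≤ max (system.length : Int) nb_cols := le_trans hnb hRc
  have hmlen : (pvMins system).length = system.length := List.length_map ..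
  have hmlt := pv_mins_bounds system nb_cols hsys
  have hcap0 : (0 : Int) ≤ max (system.length : Int) nb_cols - nb_cols := by omega
  -- abbreviations (definitional)
  have hcapN : ((max (system.length : Int) nb_cols - nb_cols).toNat : Int) =
      max (system.length : Int) nb_cols - nb_cols := Int.toNat_of_nonneg hcap0
  -- run the first-pass characterisation from the initial state
  obtain ⟨M1, B1, used1, hrun1, hM1, hB1, hu1, hflag1, hMc1, hBc1⟩ :=
    pv_char1 system output nb_cols (max (system.length : Int) nb_cols) (pvMins system) rfl
      (max (system.length : Int) nb_cols - nb_cols) rfl hsys hnb hRn hRc system 0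
      (List.replicate (max (system.length : Int) nb_cols).toNat
        (List.replicate nb_cols.toNat (0 : Int)))
      (List.replicate (max (system.length : Int) nb_cols).toNat (0 : Int))
      (List.replicate (max (system.length : Int) nb_cols).toNat (0 : Int)) 0 []
      (List.drop_zero).symm (by omega) List.length_replicate List.length_replicate
      List.length_replicate
      (by
        intro r hr
        constructor
        · intro _ hc
          simp [pvP] at hc
        · intro _
          rw [pv_getD_int _ _ _ hr]
          rcases lt_or_ge r.toNat (max (system.length : Int) nb_cols).toNat with h | h
          · rw [List.getD_eq_getElem?_getD, List.getElem?_eq_getElem (by simpa using h)]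
            simp
          · rw [List.getD_eq_getElem?_getD, List.getElem?_eq_none (by simpa using h)]
            rfl)
      (by
        rw [show pvDupC (pvMins system) 0 = 0 from rfl]
        rw [show ((0 : Nat) : Int) = 0 from rfl]
        rw [min_eq_left hcap0])
      (by rw [show pvDups (pvMins system) 0 = [] from rfl]; rfl)
      (by intro p hp; simp [pvP] at hp)
      (by
        intro s hs
        rw [show pvLk (s : Int) (pvP (pvMins system) nb_cols
          (max (system.length : Int) nb_cols - nb_cols) 0) = none from rfl]
        rw [List.getD_eq_getElem?_getD, List.getElem?_eq_getElem (by simpa using hs)]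
        simp [pvVal1])
      (by
        intro s hs
        rw [show pvLk (s : Int) (pvP (pvMins system) nb_cols
          (max (system.length : Int) nb_cols - nb_cols) 0) = none from rfl]
        rw [List.getD_eq_getElem?_getD, List.getElem?_eq_getElem (by simpa using hs)]
        simp [pvVal2])
  -- second pass via the generic placement lemma
  have hkeysPn : ((pvP (pvMins system) nb_cols ((max (system.length : Int) nb_cols) - nb_cols) system.length)).map Prod.fst |>.Nodup :=
    pv_keys_P_nodup (pvMins system) nb_cols ((max (system.length : Int) nb_cols) - nb_cols) hmlt system.length (by omega)
  have hpend_drop : ((pvDups (pvMins system) system.length).filter (fun j => decide (((max (system.length : Int) nb_cols) - nb_cols) ≤ (pvDupC (pvMins system) j : Int)))) = (pvDups (pvMins system) system.length).drop ((max (system.length : Int) nb_cols) - nb_cols).toNat := by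
    apply pv_filter_pos_drop
    intro k hk
    obtain ⟨_, hdc, _⟩ := pv_dups_getElem (pvMins system) system.length k hk
    rw [hdc]
    simp only [decide_eq_decide]
    omega
  have hdupsAlt : pvAltDups (pvMins system) = (pvDups (pvMins system) system.length).map (fun j : Nat => (j : Int)) := by
    rw [pv_alt_dups_eq, hmlen]
  have hsliceTo : PySem.List.slice (pvAltDups (pvMins system)) none (some ((max (system.length : Int) nb_cols) - nb_cols)) =
      ((pvDups (pvMins system) system.length).take ((max (system.length : Int) nb_cols) - nb_cols).toNat).map (fun j : Nat => (j : Int)) := by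
    rw [PySem.List.slice_to _ hcap0, hdupsAlt, List.map_take]
  have hsliceFrom : PySem.List.slice (pvAltDups (pvMins system)) (some ((max (system.length : Int) nb_cols) - nb_cols)) none =
      ((pvDups (pvMins system) system.length).drop ((max (system.length : Int) nb_cols) - nb_cols).toNat).map (fun j : Nat => (j : Int)) := by
    rw [PySem.List.slice_from _ hcap0, hdupsAlt, List.map_drop]
  have hmemA1 : ∀ p : Int × Int, p ∈ ((pvAltPrimaries (pvMins system)) ++ ((PySem.List.enumerate (PySem.List.slice (pvAltDups (pvMins system)) none (some ((max (system.length : Int) nb_cols) - nb_cols)))).map (fun p => (nb_cols + p.1, p.2)))) ↔ p ∈ (pvP (pvMins system) nb_cols ((max (system.length : Int) nb_cols) - nb_cols) system.length) := by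
    intro p
    rw [List.mem_append, pv_alt_primaries_eq, hmlen, pv_mem_P, hsliceTo]
    constructor
    · rintro (hp | hp)
      · rw [List.mem_map] at hp
        obtain ⟨j, hj, hpe⟩ := hp
        rw [List.mem_filter, List.mem_range] at hj
        subst hpe
        refine ⟨j, hj.1, ?_, rfl⟩
        unfold pvRowOf1
        rw [if_pos hj.2]
      · rw [List.mem_map] at hp
        obtain ⟨q, hq, hpe⟩ := hp
        rw [PySem.List.mem_enumerate_iff] at hq
        obtain ⟨k, hk, hqe⟩ := hq
        have hkt : k < ((pvDups (pvMins system) system.length).take ((max (system.length : Int) nb_cols) - nb_cols).toNat).length := by simpa using hk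
        have hkc : k < ((max (system.length : Int) nb_cols) - nb_cols).toNat := by rw [List.length_take] at hkt; omega
        have hkd : k < (pvDups (pvMins system) system.length).length := by rw [List.length_take] at hkt; omega
        obtain ⟨hprimF, hdc, hjn⟩ := pv_dups_getElem (pvMins system) system.length k hkd
        subst hpe
        subst hqe
        refine ⟨(pvDups (pvMins system) system.length)[k], hjn, ?_, ?_⟩
        · unfold pvRowOf1
          rw [if_neg (by rw [hprimF]; exact Bool.false_ne_true), if_pos (by rw [hdc]; omega), hdc]
          simp
        · simp [List.getElem_take]
    · rintro ⟨j, hj, hro, hp2⟩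
      obtain ⟨p1, p2⟩ := p
      simp only at hro hp2
      subst hp2
      by_cases hprim : pvPrimB (pvMins system) j
      · left
        rw [List.mem_map]
        refine ⟨j, List.mem_filter.2 ⟨List.mem_range.2 hj, hprim⟩, ?_⟩
        unfold pvRowOf1 at hro
        rw [if_pos hprim, Option.some.injEq] at hro
        rw [hro]
      · right
        unfold pvRowOf1 at hro
        rw [if_neg hprim] at hro
        by_cases hc : (pvDupC (pvMins system) j : Int) < ((max (system.length : Int) nb_cols) - nb_cols)
        · rw [if_pos hc, Option.some.injEq] at hro
          obtain ⟨k, hk, hkj, hdcj⟩ := pv_dups_mem (pvMins system) system.length j hj (Bool.eq_false_iff.2 hprim)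
          have hkc : k < ((max (system.length : Int) nb_cols) - nb_cols).toNat := by omega
          have hxl : k < (((pvDups (pvMins system) system.length).take ((max (system.length : Int) nb_cols) - nb_cols).toNat).map (fun j : Nat => (j : Int))).length := by
            simp [List.length_take]
            omega
          rw [List.mem_map]
          refine ⟨((0 + (k : Int)), (((pvDups (pvMins system) system.length).take ((max (system.length : Int) nb_cols) - nb_cols).toNat).map (fun j : Nat => (j : Int)))[k]'hxl),
            (PySem.List.mem_enumerate_iff _ _ _).2 ⟨k, hxl, rfl⟩, ?_⟩
          simp only [List.getElem_map]
          rw [show ((pvDups (pvMins system) system.length).take ((max (system.length : Int) nb_cols) - nb_cols).toNat)[k]'(by simpa using hxl) = (pvDups (pvMins system) system.length)[k]'hk from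
            List.getElem_take]
          rw [hkj, ← hro, ← hdcj]
          simp
        · rw [if_neg hc] at hro
          exact absurd hro (by simp)
  have hkeysA1mem : ∀ r : Int, r ∈ ((pvAltPrimaries (pvMins system)) ++ ((PySem.List.enumerate (PySem.List.slice (pvAltDups (pvMins system)) none (some ((max (system.length : Int) nb_cols) - nb_cols)))).map (fun p => (nb_cols + p.1, p.2)))).map Prod.fst ↔ r ∈ (pvP (pvMins system) nb_cols ((max (system.length : Int) nb_cols) - nb_cols) system.length).map Prod.fst := by
    intro r
    constructor <;> intro h
    · obtain ⟨p, hp, he⟩ := List.mem_map.1 h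
      exact List.mem_map.2 ⟨p, (hmemA1 p).1 hp, he⟩
    · obtain ⟨p, hp, he⟩ := List.mem_map.1 h
      exact List.mem_map.2 ⟨p, (hmemA1 p).2 hp, he⟩
  have hfree_eq : ((PySem.List.pyRange 0 (max (system.length : Int) nb_cols) 1).filter (fun r => !((((pvAltPrimaries (pvMins system)) ++ ((PySem.List.enumerate (PySem.List.slice (pvAltDups (pvMins system)) none (some ((max (system.length : Int) nb_cols) - nb_cols)))).map (fun p => (nb_cols + p.1, p.2)))).map Prod.fst).contains r))) = ((PySem.List.pyRange 0 (max (system.length : Int) nb_cols) 1).filter (fun r => PySem.List.pyGetD used1 r 0 == 0)) := by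
    apply List.filter_congr
    intro r hr
    have hr0 : 0 ≤ r := (PySem.List.mem_pyRange_one.1 hr).1
    have hfl := hflag1 r hr0
    by_cases hmem : r ∈ (pvP (pvMins system) nb_cols ((max (system.length : Int) nb_cols) - nb_cols) system.length).map Prod.fst
    · have h1 : (((pvAltPrimaries (pvMins system)) ++ ((PySem.List.enumerate (PySem.List.slice (pvAltDups (pvMins system)) none (some ((max (system.length : Int) nb_cols) - nb_cols)))).map (fun p => (nb_cols + p.1, p.2)))).map Prod.fst).contains r = true :=
        List.contains_iff_mem.2 ((hkeysA1mem r).2 hmem)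
      have h2 : ¬ PySem.List.pyGetD used1 r 0 = 0 := fun hz => (hfl.1 hz) hmem
      rw [h1]
      simp only [Bool.not_true]
      exact (beq_eq_false_iff_ne.2 h2).symm
    · have h1 : (((pvAltPrimaries (pvMins system)) ++ ((PySem.List.enumerate (PySem.List.slice (pvAltDups (pvMins system)) none (some ((max (system.length : Int) nb_cols) - nb_cols)))).map (fun p => (nb_cols + p.1, p.2)))).map Prod.fst).contains r = false :=
        Bool.eq_false_iff.2 (fun hc => hmem ((hkeysA1mem r).1 (List.contains_iff_mem.1 hc)))
      have h2 : PySem.List.pyGetD used1 r 0 = 0 := hfl.2 hmem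
      rw [h1, h2]
      simp
  have hfreem_nodup : (((PySem.List.pyRange 0 (max (system.length : Int) nb_cols) 1).filter (fun r => PySem.List.pyGetD used1 r 0 == 0))).Nodup :=
    List.Nodup.filter _ (PySem.List.nodup_pyRange_one 0 (max (system.length : Int) nb_cols))
  obtain ⟨M2, B2, hrun2, hM2, hB2, hMc2, hBc2⟩ := pv_char2 system output nb_cols
    (((pvDups (pvMins system) system.length).filter (fun j => decide (((max (system.length : Int) nb_cols) - nb_cols) ≤ (pvDupC (pvMins system) j : Int)))).zip ((PySem.List.pyRange 0 (max (system.length : Int) nb_cols) 1).filter (fun r => PySem.List.pyGetD used1 r 0 == 0))) (pvP (pvMins system) nb_cols ((max (system.length : Int) nb_cols) - nb_cols) system.length) M1 B1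
    (by rw [pv_map_snd_zip]; exact (List.take_sublist _ _).nodup hfreem_nodup)
    (by
      rintro ⟨a, b⟩ hq
      obtain ⟨hq1, hq2⟩ := List.of_mem_zip hq
      have hbr := List.mem_filter.1 hq2
      have hb0 : 0 ≤ b := (PySem.List.mem_pyRange_one.1 hbr.1).1
      have hbR : b < (max (system.length : Int) nb_cols) := (PySem.List.mem_pyRange_one.1 hbr.1).2
      refine ⟨hb0, by rw [hM1]; omega, ?_⟩
      have hz : PySem.List.pyGetD used1 b 0 = 0 := by
        have := hbr.2
        simpa using this
      exact (hflag1 b hb0).1 hz)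
    (by omega)
    (fun s hs => hMc1 s (by omega))
    (fun s hs => hBc1 s (by omega))
  -- keys of the combined mid assignment are distinct
  have hkeysQF : ((((pvP (pvMins system) nb_cols ((max (system.length : Int) nb_cols) - nb_cols) system.length) ++ (((pvDups (pvMins system) system.length).filter (fun j => decide (((max (system.length : Int) nb_cols) - nb_cols) ≤ (pvDupC (pvMins system) j : Int)))).zip ((PySem.List.pyRange 0 (max (system.length : Int) nb_cols) 1).filter (fun r => PySem.List.pyGetD used1 r 0 == 0))).map (fun q => (q.2, (q.1 : Int))))).map Prod.fst).Nodup := by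
    rw [List.map_append, List.nodup_append]
    refine ⟨hkeysPn, ?_, ?_⟩
    · rw [List.map_map]
      rw [show ((fun p : Int × Int => p.1) ∘ (fun q : Nat × Int => (q.2, (q.1 : Int)))) =
        (fun q : Nat × Int => q.2) from rfl]
      rw [pv_map_snd_zip]
      exact (List.take_sublist _ _).nodup hfreem_nodup
    · intro a ha b hb
      rw [List.map_map] at hb
      rw [show ((fun p : Int × Int => p.1) ∘ (fun q : Nat × Int => (q.2, (q.1 : Int)))) =
        (fun q : Nat × Int => q.2) from rfl] at hb
      rw [pv_map_snd_zip] at hb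
      have hbf : b ∈ ((PySem.List.pyRange 0 (max (system.length : Int) nb_cols) 1).filter (fun r => PySem.List.pyGetD used1 r 0 == 0)) := (List.take_sublist _ _).mem hb
      have hbr := List.mem_filter.1 hbf
      have hb0 : 0 ≤ b := (PySem.List.mem_pyRange_one.1 hbr.1).1
      have hz : PySem.List.pyGetD used1 b 0 = 0 := by simpa using hbr.2
      intro he
      exact ((hflag1 b hb0).1 hz) (he ▸ ha)
  -- keys of B's assignment list are distinct
  have hkeysPrim : (((pvAltPrimaries (pvMins system))).map Prod.fst).Nodup := by
    rw [pv_alt_primaries_eq, hmlen, List.map_map]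
    rw [show ((fun p : Int × Int => p.1) ∘ (fun j : Nat => ((pvMins system).getD j 0, (j : Int)))) =
      (fun j : Nat => (pvMins system).getD j 0) from rfl]
    rw [List.Nodup, List.pairwise_map]
    refine List.Pairwise.imp_of_mem ?_ (List.Pairwise.filter _ List.pairwise_lt_range)
    intro a b hamem hbmem hab he
    rw [List.mem_filter, List.mem_range] at hamem hbmem
    have hbl : b < (pvMins system).length := by omega
    have hp := (pv_prim_iff (pvMins system) b).1 hbmem.2
    apply hp
    have hga : (pvMins system).getD a 0 = (pvMins system)[a] := by
      rw [List.getD_eq_getElem (pvMins system) 0 (by omega)]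
    have hg : ((pvMins system).take b)[a]'(by simp; omega) = (pvMins system)[a] :=
      List.getElem_take
    rw [← he, hga]
    exact hg ▸ List.getElem_mem _
  have hkeysSupp : ((((PySem.List.enumerate (PySem.List.slice (pvAltDups (pvMins system)) none (some ((max (system.length : Int) nb_cols) - nb_cols)))).map (fun p => (nb_cols + p.1, p.2)))).map Prod.fst).Nodup := by
    rw [List.map_map]
    rw [show ((fun p : Int × Int => p.1) ∘ (fun p : Int × Int => (nb_cols + p.1, p.2))) =
      (fun p : Int × Int => nb_cols + p.1) from rfl]
    rw [List.Nodup, List.pairwise_map]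
    refine List.Pairwise.imp_of_mem ?_ (PySem.List.pairwise_lt_enumerate _ 0)
    intro a b _ _ hab
    omega
  have hkeysA1 : ((((pvAltPrimaries (pvMins system)) ++ ((PySem.List.enumerate (PySem.List.slice (pvAltDups (pvMins system)) none (some ((max (system.length : Int) nb_cols) - nb_cols)))).map (fun p => (nb_cols + p.1, p.2))))).map Prod.fst).Nodup := by
    rw [List.map_append, List.nodup_append]
    refine ⟨hkeysPrim, hkeysSupp, ?_⟩
    intro a ha b hb
    rw [pv_alt_primaries_eq, hmlen, List.map_map] at ha
    obtain ⟨j, hj, hje⟩ := List.mem_map.1 ha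
    rw [List.mem_filter, List.mem_range] at hj
    have haval : a = (pvMins system).getD j 0 := by rw [← hje]; rfl
    have halt' : a < nb_cols := by
      rw [haval]
      exact (hmlt j (by omega)).2
    obtain ⟨q, hq, hqe⟩ := List.mem_map.1 hb
    obtain ⟨q0, hq0, hq0e⟩ := List.mem_map.1 hq
    obtain ⟨k, hk, hqev⟩ := (PySem.List.mem_enumerate_iff _ _ _).1 hq0
    have hbval : b = nb_cols + (0 + (k : Int)) := by
      rw [← hqe, ← hq0e, hqev]
    omega
  have hkeysA2 : (((((pvAltPrimaries (pvMins system)) ++ ((PySem.List.enumerate (PySem.List.slice (pvAltDups (pvMins system)) none (some ((max (system.length : Int) nb_cols) - nb_cols)))).map (fun p => (nb_cols + p.1, p.2)))) ++ (((PySem.List.pyRange 0 (max (system.length : Int) nb_cols) 1).filter (fun r => !((((pvAltPrimaries (pvMins system)) ++ ((PySem.List.enumerate (PySem.List.slice (pvAltDups (pvMins system)) none (some ((max (system.length : Int) nb_cols) - nb_cols)))).map (fun p => (nb_cols + p.1, p.2)))).map Prod.fst).contains r))).zip (PySem.List.slice (pvAltDups (pvMins system)) (some ((max (system.length : Int) nb_cols)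 - nb_cols)) none)))).map Prod.fst).Nodup := by
    rw [List.map_append, List.nodup_append]
    refine ⟨hkeysA1, ?_, ?_⟩
    · rw [pv_map_fst_zip]
      rw [hfree_eq]
      exact (List.take_sublist _ _).nodup hfreem_nodup
    · intro a ha b hb
      rw [pv_map_fst_zip] at hb
      have hbf : b ∈ ((PySem.List.pyRange 0 (max (system.length : Int) nb_cols) 1).filter (fun r => !((((pvAltPrimaries (pvMins system)) ++ ((PySem.List.enumerate (PySem.List.slice (pvAltDups (pvMins system)) none (some ((max (system.length : Int) nb_cols) - nb_cols)))).map (fun p => (nb_cols + p.1, p.2)))).map Prod.fst).contains r))) := (List.take_sublist _ _).mem hb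
      have hbr := List.mem_filter.1 hbf
      intro he
      subst he
      rw [Bool.not_eq_eq_eq_not, Bool.not_true] at hbr
      exact absurd (List.contains_iff_mem.2 ha) (by rw [hbr.2]; simp)
  have hzip_lists : ((((pvDups (pvMins system) system.length).filter (fun j => decide (((max (system.length : Int) nb_cols) - nb_cols) ≤ (pvDupC (pvMins system) j : Int)))).zip ((PySem.List.pyRange 0 (max (system.length : Int) nb_cols) 1).filter (fun r => PySem.List.pyGetD used1 r 0 == 0)))).map (fun q => (q.2, (q.1 : Int))) = (((PySem.List.pyRange 0 (max (system.length : Int) nb_cols) 1).filter (fun r => !((((pvAltPrimaries (pvMins system)) ++ ((PySem.List.enumerate (PySem.List.slice (pvAltDups (pvMins system)) none (some ((max (system.length : Int) nb_cols) - nb_cols)))).map (fun p => (nb_cols + p.1, p.2)))).map Prod.fst).contains r))).zip (PySem.List.slice (pvAltDups (pvMins system)) (some ((max (system.length : Int) nb_cols) - nb_cols)) none)) := by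
    rw [pv_zip_swap_cast, ← hfree_eq, hpend_drop, ← hsliceFrom]
  have hmemA2 : ∀ p : Int × Int, p ∈ (((pvAltPrimaries (pvMins system)) ++ ((PySem.List.enumerate (PySem.List.slice (pvAltDups (pvMins system)) none (some ((max (system.length : Int) nb_cols) - nb_cols)))).map (fun p => (nb_cols + p.1, p.2)))) ++ (((PySem.List.pyRange 0 (max (system.length : Int) nb_cols) 1).filter (fun r => !((((pvAltPrimaries (pvMins system)) ++ ((PySem.List.enumerate (PySem.List.slice (pvAltDups (pvMins system)) none (some ((max (system.length : Int) nb_cols) - nb_cols)))).map (fun p => (nb_cols + p.1, p.2)))).map Prod.fst).contains r))).zip (PySem.List.slice (pvAltDups (pvMins system)) (some ((max (system.length : Int) nb_cols) - nb_cols)) none))) ↔ p ∈ ((pvP (pvMins system) nb_cols ((max (system.length : Int) nb_cols) - nb_cols) system.length) ++ (((pvDups (pvMins system) system.length).filter (fun j => decide (((max (system.length : Int) nb_cols) - nb_cols) ≤ (pvDupC (pvMins system) j : Int)))).zip ((PySem.List.pyRange 0 (max (system.length : Int) nb_cols) 1).filter (fun r => PySem.List.pyGetD used1 r 0 == 0))).map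 (fun q => (q.2, (q.1 : Int)))) := by
    intro p
    constructor
    · intro h
      rcases List.mem_append.1 h with h | h
      · exact List.mem_append.2 (Or.inl ((hmemA1 p).1 h))
      · rw [← hzip_lists] at h
        exact List.mem_append.2 (Or.inr h)
    · intro h
      rcases List.mem_append.1 h with h | h
      · exact List.mem_append.2 (Or.inl ((hmemA1 p).2 h))
      · rw [hzip_lists] at h
        exact List.mem_append.2 (Or.inr h)
  have hlook : ∀ r : Int, pvLk r (((pvAltPrimaries (pvMins system)) ++ ((PySem.List.enumerate (PySem.List.slice (pvAltDups (pvMins system)) none (some ((max (system.length : Int) nb_cols) - nb_cols)))).map (fun p => (nb_cols + p.1, p.2)))) ++ (((PySem.List.pyRange 0 (max (system.length : Int) nb_cols) 1).filter (fun r => !((((pvAltPrimaries (pvMins system)) ++ ((PySem.List.enumerate (PySem.List.slice (pvAltDups (pvMins system)) none (some ((max (system.length : Int) nb_cols) - nb_cols)))).map (fun p => (nb_cols + p.1, p.2)))).map Prod.fst).contains r))).zip (PySem.List.slice (pvAltDups (pvMins system)) (some ((max (system.length : Int) nb_cols) - nb_cols)) none))) = pvLk r ((pvP (pvMins system) nb_cols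 ((max (system.length : Int) nb_cols) - nb_cols) system.length) ++ (((pvDups (pvMins system) system.length).filter (fun j => decide (((max (system.length : Int) nb_cols) - nb_cols) ≤ (pvDupC (pvMins system) j : Int)))).zip ((PySem.List.pyRange 0 (max (system.length : Int) nb_cols) 1).filter (fun r => PySem.List.pyGetD used1 r 0 == 0))).map (fun q => (q.2, (q.1 : Int)))) := by
    intro r
    apply pv_lookup_ext _ _ hmemA2 hkeysA2 hkeysQF
  have halt : build_binary_matrix_optimized_alt system output nb_cols =
      ((((PySem.List.pyRange 0 (max (system.length : Int) nb_cols) 1).map (fun r => match ((((pvAltPrimaries (pvMins system)) ++ ((PySem.List.enumerate (PySem.List.slice (pvAltDups (pvMins system)) none (some ((max (system.length : Int) nb_cols) - nb_cols)))).map (fun p => (nb_cols + p.1, p.2)))) ++ (((PySem.List.pyRange 0 (max (system.length : Int) nb_cols) 1).filter (fun r => !((((pvAltPrimaries (pvMins system)) ++ ((PySem.List.enumerate (PySem.List.slice (pvAltDups (pvMins system)) none (some ((max (system.length : Int) nb_cols) - nb_cols)))).map (fun p => (nb_cols + p.1, p.2)))).map Prod.fst).contains r))).zip (PySem.List.slice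 (pvAltDups (pvMins system)) (some ((max (system.length : Int) nb_cols) - nb_cols)) none)))).filterMap (fun p => if p.1 == r then some p.2 else none) with
      | [] => (List.replicate nb_cols.toNat (0 : Int), (0 : Int))
      | i :: _ => (pvRowContent nb_cols (PySem.List.pyGetD system i []), PySem.List.pyGetD output i 0)))).map Prod.fst, (((PySem.List.pyRange 0 (max (system.length : Int) nb_cols) 1).map (fun r => match ((((pvAltPrimaries (pvMins system)) ++ ((PySem.List.enumerate (PySem.List.slice (pvAltDups (pvMins system)) none (some ((max (system.length : Int) nb_cols) - nb_cols)))).map (fun p => (nb_cols + p.1, p.2)))) ++ (((PySem.List.pyRange 0 (max (system.length : Int) nb_cols) 1).filter (fun r => !((((pvAltPrimaries (pvMins system)) ++ ((PySem.List.enumerate (PySem.List.slice (pvAltDups (pvMins system)) none (some ((max (system.length : Int) nb_cols) - nb_cols)))).map (fun p => (nb_cols + p.1, p.2)))).map Prod.fst).contains r))).zip (PySem.List.slice (pvAltDups (pvMins system)) (some ((max (system.length : Int) nb_cols) - nb_cols)) none)))).filterMap (fun p => if p.1 == r then some p.2 else none) with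
      | [] => (List.replicate nb_cols.toNat (0 : Int), (0 : Int))
      | i :: _ => (pvRowContent nb_cols (PySem.List.pyGetD system i []), PySem.List.pyGetD output i 0)))).map Prod.snd) := rfl
  have hmid : pvMid system output nb_cols = (M2, B2) := by
    show (match pvMidLoop1 nb_cols (max (system.length : Int) nb_cols) output 0 system
        (List.replicate (max (system.length : Int) nb_cols).toNat (List.replicate nb_cols.toNat (0 : Int)))
        (List.replicate (max (system.length : Int) nb_cols).toNat (0 : Int)) (List.replicate (max (system.length : Int) nb_cols).toNat (0 : Int)) 0 [] with
      | (M1, B1, used, _, pending) =>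
          pvMidLoop2 system output
            (pending.zip ((PySem.List.pyRange 0 (max (system.length : Int) nb_cols) 1).filter
              (fun r => PySem.List.pyGetD used r 0 == 0))) M1 B1) = (M2, B2)
    rw [hrun1]
    exact hrun2
  rw [hmid, halt]
  have hval1 : ∀ o : Option Int, pvVal1 system nb_cols o =
      (match o with
       | none => (List.replicate nb_cols.toNat (0 : Int), (0 : Int))
       | some i => (pvRowContent nb_cols (PySem.List.pyGetD system i []),
           PySem.List.pyGetD output i 0)).1 := by
    intro o
    cases o <;> rfl
  have hval2 : ∀ o : Option Int, pvVal2 output o =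
      (match o with
       | none => (List.replicate nb_cols.toNat (0 : Int), (0 : Int))
       | some i => (pvRowContent nb_cols (PySem.List.pyGetD system i []),
           PySem.List.pyGetD output i 0)).2 := by
    intro o
    cases o <;> rfl
  have hlenR : (((PySem.List.pyRange 0 (max (system.length : Int) nb_cols) 1).map (fun r => match ((((pvAltPrimaries (pvMins system)) ++ ((PySem.List.enumerate (PySem.List.slice (pvAltDups (pvMins system)) none (some ((max (system.length : Int) nb_cols) - nb_cols)))).map (fun p => (nb_cols + p.1, p.2)))) ++ (((PySem.List.pyRange 0 (max (system.length : Int) nb_cols) 1).filter (fun r => !((((pvAltPrimaries (pvMins system)) ++ ((PySem.List.enumerate (PySem.List.slice (pvAltDups (pvMins system)) none (some ((max (system.length : Int) nb_cols) - nb_cols)))).map (fun p => (nb_cols + p.1, p.2)))).map Prod.fst).contains r))).zip (PySem.List.slice (pvAltDups (pvMins system)) (some ((max (system.length : Int) nb_cols) - nb_cols)) none)))).filterMap (fun p => if p.1 == r then some p.2 else none) with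
      | [] => (List.replicate nb_cols.toNat (0 : Int), (0 : Int))
      | i :: _ => (pvRowContent nb_cols (PySem.List.pyGetD system i []), PySem.List.pyGetD output i 0)))).length = (max (system.length : Int) nb_cols).toNat := by
    rw [List.length_map, PySem.List.length_pyRange_one]
    simp
  have hM2R : M2.length = (max (system.length : Int) nb_cols).toNat := by omega
  have hB2R : B2.length = (max (system.length : Int) nb_cols).toNat := by omega
  refine Prod.ext ?_ ?_
  · show M2 = (((PySem.List.pyRange 0 (max (system.length : Int) nb_cols) 1).map (fun r => match ((((pvAltPrimaries (pvMins system)) ++ ((PySem.List.enumerate (PySem.List.slice (pvAltDups (pvMins system)) none (some ((max (system.length : Int) nb_cols) - nb_cols)))).map (fun p => (nb_cols + p.1, p.2)))) ++ (((PySem.List.pyRange 0 (max (system.length : Int) nb_cols) 1).filter (fun r => !((((pvAltPrimaries (pvMins system)) ++ ((PySem.List.enumerate (PySem.List.slice (pvAltDups (pvMins system)) none (some ((max (system.length : Int) nb_cols) - nb_cols)))).map (fun p => (nb_cols + p.1, p.2)))).map Prod.fst).contains r))).zip (PySem.List.slice (pvAltDups (pvMins system)) (some ((max (system.length : Int) nb_cols)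 - nb_cols)) none)))).filterMap (fun p => if p.1 == r then some p.2 else none) with
      | [] => (List.replicate nb_cols.toNat (0 : Int), (0 : Int))
      | i :: _ => (pvRowContent nb_cols (PySem.List.pyGetD system i []), PySem.List.pyGetD output i 0)))).map Prod.fst
    apply List.ext_getElem
    · rw [List.length_map, hlenR, hM2R]
    · intro k hk1 hk2
      have hkR : k < (max (system.length : Int) nb_cols).toNat := by omega
      rw [List.getElem_map, List.getElem_map, PySem.List.getElem_pyRange_one]
      rw [show M2[k] = M2.getD k [] from (List.getD_eq_getElem M2 [] hk1).symm]
      rw [hMc2 k (by omega)]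
      rw [pv_hits_match (((pvAltPrimaries (pvMins system)) ++ ((PySem.List.enumerate (PySem.List.slice (pvAltDups (pvMins system)) none (some ((max (system.length : Int) nb_cols) - nb_cols)))).map (fun p => (nb_cols + p.1, p.2)))) ++ (((PySem.List.pyRange 0 (max (system.length : Int) nb_cols) 1).filter (fun r => !((((pvAltPrimaries (pvMins system)) ++ ((PySem.List.enumerate (PySem.List.slice (pvAltDups (pvMins system)) none (some ((max (system.length : Int) nb_cols) - nb_cols)))).map (fun p => (nb_cols + p.1, p.2)))).map Prod.fst).contains r))).zip (PySem.List.slice (pvAltDups (pvMins system)) (some ((max (system.length : Int) nb_cols) - nb_cols)) none))) ((0 : Int) + (k : Int))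
        ((List.replicate nb_cols.toNat (0 : Int), (0 : Int)))
        (fun i => (pvRowContent nb_cols (PySem.List.pyGetD system i []),
          PySem.List.pyGetD output i 0))]
      rw [hlook ((0 : Int) + (k : Int))]
      rw [show ((0 : Int) + (k : Int)) = (k : Int) by omega]
      exact hval1 _
  · show B2 = (((PySem.List.pyRange 0 (max (system.length : Int) nb_cols) 1).map (fun r => match ((((pvAltPrimaries (pvMins system)) ++ ((PySem.List.enumerate (PySem.List.slice (pvAltDups (pvMins system)) none (some ((max (system.length : Int) nb_cols) - nb_cols)))).map (fun p => (nb_cols + p.1, p.2)))) ++ (((PySem.List.pyRange 0 (max (system.length : Int) nb_cols) 1).filter (fun r => !((((pvAltPrimaries (pvMins system)) ++ ((PySem.List.enumerate (PySem.List.slice (pvAltDups (pvMins system)) none (some ((max (system.length : Int) nb_cols) - nb_cols)))).map (fun p => (nb_cols + p.1, p.2)))).map Prod.fst).contains r))).zip (PySem.List.slice (pvAltDups (pvMins system)) (some ((max (system.length : Int) nb_cols) - nb_cols)) none)))).filterMap (fun p => if p.1 == r then some p.2 else none) with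
      | [] => (List.replicate nb_cols.toNat (0 : Int), (0 : Int))
      | i :: _ => (pvRowContent nb_cols (PySem.List.pyGetD system i []), PySem.List.pyGetD output i 0)))).map Prod.snd
    apply List.ext_getElem
    · rw [List.length_map, hlenR, hB2R]
    · intro k hk1 hk2
      have hkR : k < (max (system.length : Int) nb_cols).toNat := by omega
      rw [List.getElem_map, List.getElem_map, PySem.List.getElem_pyRange_one]
      rw [show B2[k] = B2.getD k 0 from (List.getD_eq_getElem B2 0 hk1).symm]
      rw [hBc2 k (by omega)]
      rw [pv_hits_match (((pvAltPrimaries (pvMins system)) ++ ((PySem.List.enumerate (PySem.List.slice (pvAltDups (pvMins system)) none (some ((max (system.length : Int) nb_cols) - nb_cols)))).map (fun p => (nb_cols + p.1, p.2)))) ++ (((PySem.List.pyRange 0 (max (system.length : Int) nb_cols) 1).filter (fun r => !((((pvAltPrimaries (pvMins system)) ++ ((PySem.List.enumerate (PySem.List.slice (pvAltDups (pvMins system)) none (some ((max (system.length : Int) nb_cols) - nb_cols)))).map (fun p => (nb_cols + p.1, p.2)))).map Prod.fst).contains r))).zip (PySem.List.slice (pvAltDups (pvMins system)) (some ((max (system.length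 : Int) nb_cols) - nb_cols)) none))) ((0 : Int) + (k : Int))
        ((List.replicate nb_cols.toNat (0 : Int), (0 : Int)))
        (fun i => (pvRowContent nb_cols (PySem.List.pyGetD system i []),
          PySem.List.pyGetD output i 0))]
      rw [hlook ((0 : Int) + (k : Int))]
      rw [show ((0 : Int) + (k : Int)) = (k : Int) by omega]
      exact hval2 _



-- ===== VERDICT =====
theorem build_binary_matrix_optimized_spec : Claim_equal_build_binary_matrix_optimized := by
  intro system output nb_cols _hdom hpre
  obtain ⟨hsys, hlen⟩ := hpre
  unfold Spec_build_binary_matrix_optimized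
  by_cases hsysE : system = []
  · subst hsysE
    have h1 : build_binary_matrix_optimized [] output nb_cols =
        (List.replicate (max (0 : Int) nb_cols).toNat (List.replicate nb_cols.toNat (0 : Int)),
         List.replicate (max (0 : Int) nb_cols).toNat (0 : Int)) := rfl
    rw [h1]
    simp only [build_binary_matrix_optimized_alt, pvMins, pvAltPrimaries, pvAltDups,
      PySem.List.enumerate_nil, List.map_nil, List.filterMap_nil, List.nil_append,
      PySem.List.slice, List.take_nil, List.drop_nil, List.zip_nil_right, List.append_nil,
      List.length_nil]
    simp [List.map_map, List.map_const', PySem.List.length_pyRange_one]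
  · rw [pv_A_eq_mid system output nb_cols hsys hlen hsysE,
      pv_mid_eq_alt system output nb_cols hsys hsysE]
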